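-- pv_equiv track=rewrite | github.com/BurakAkten/GTUCourses | CSE321-Intro.-To-Algorithm-Design/HW3/labify_141044045.py | findMinimumCostToLabifyGTU
-- ===== SOURCE A (Python) =====
-- def findMinimumCostToLabifyGTU(x , y , GTUMap):
--
-- 	size = len(GTUMap)
-- 	keys = GTUMap.keys()
-- 	#if the cost of building a lab is less than repairing a road,
-- 	#then the solution is build a lab at every department.
-- 	if (x < y):
-- 		return size * x
--
-- 	identified = [False for i in range(size)] #To idetified the vertecis
-- 	parentArr = [-1 for i in range(size)]     #to holds parents and childerens in graph
--
-- 	#After this loop the parentArr is found.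
-- 	for key in keys:
-- 		parentArr , identified = BFS(parentArr , identified , key , GTUMap)
--
-- 	#in this part the cost is calculating.
-- 	cost = 0
-- 	for i in parentArr:
-- 		cost += x if i == -1 else y
--
-- 	return cost
--
-- def BFS(parentArr ,identified, startVertex , GTUMap):
--
-- 	queue = list() #to control the neigbours
--
-- 	identified[startVertex - 1] = True # make identified the given vertex
-- 	queue.insert(0 , startVertex - 1)
--
-- 	while (len(queue) != 0):
-- 		current = queue.pop() # 0,1,2,3...
--
-- 		neighbors = GTUMap.get(current + 1)
-- 		for neighbor in neighbors:
-- 			if(identified[neighbor - 1] == False):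
-- 				#Mark it identified.
-- 				identified[neighbor - 1] = True
-- 				#Place it into the queue.
-- 				queue.insert(0,neighbor - 1);
-- 				#Insert the edge (current, neighbor) into the tree. */
-- 				parentArr[neighbor - 1] = current;
-- 	return parentArr , identified
-- ===== SOURCE B (Python) =====
-- def findMinimumCostToLabifyGTU(x, y, GTUMap):
--     n = len(GTUMap)
--     # a lab per department is optimal when labs are cheaper than roads
--     if x < y:
--         return n * x
--     # union-find over the departments: each connected component needs one lab,
--     # every other department of the component one repaired road.
--     parent = {v: v for v in GTUMap}
--
--     def find(v):
--         while parent[v] != v: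
--             v = parent[v]
--         return v
--
--     for v in GTUMap:
--         for w in GTUMap[v]:
--             rv = find(v)
--             rw = find(w)
--             if rv != rw:
--                 if rv < rw:
--                     parent[rw] = rv
--                 else:
--                     parent[rv] = rw
--     comp = 0
--     for v in parent:
--         if parent[v] == v:
--             comp += 1
--     return comp * x + (n - comp) * y
-- ===== Notes on version B (the rewrite author's own statement) =====
-- stated objective: alternative
-- what changed: A repairs the graph by running a parent-array BFS (list queue with insert(0)) from every key and then scans the parent array; B never traverses the graph at all: it merges the endpoints of each listed road in a union-find (union by smaller root) and counts the surviving roots, returning comp*x + (n-comp)*y.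
-- outside the precondition, e.g. on findMinimumCostToLabifyGTU(5, 3, {1: [], 2: [1]}): A returns 10, B returns 8; on findMinimumCostToLabifyGTU(5, 3, {0: [1], 1: [1]}): A returns 10, B returns 8
import Mathlib
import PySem

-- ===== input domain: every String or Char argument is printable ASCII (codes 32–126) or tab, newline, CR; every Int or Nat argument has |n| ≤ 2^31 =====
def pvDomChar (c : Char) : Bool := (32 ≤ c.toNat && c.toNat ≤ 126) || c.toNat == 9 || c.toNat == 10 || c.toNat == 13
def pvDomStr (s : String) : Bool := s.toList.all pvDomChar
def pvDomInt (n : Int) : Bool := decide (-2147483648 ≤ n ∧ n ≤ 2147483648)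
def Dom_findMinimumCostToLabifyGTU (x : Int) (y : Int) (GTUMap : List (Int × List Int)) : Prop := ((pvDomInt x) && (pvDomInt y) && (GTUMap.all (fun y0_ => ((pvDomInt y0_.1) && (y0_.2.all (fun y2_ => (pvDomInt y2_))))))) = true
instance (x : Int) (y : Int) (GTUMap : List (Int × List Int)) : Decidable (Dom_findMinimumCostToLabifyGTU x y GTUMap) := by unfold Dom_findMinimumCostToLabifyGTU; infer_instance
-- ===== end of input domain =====

-- B replaces A's graph traversal (a parent-array BFS with an insert(0)/pop list queue run
-- from every key, then a cost scan over the parent array) by a union-find: it merges the two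
-- endpoints of every listed road (union by smaller root) and counts the surviving roots.

-- ===== PORT A =====

/-- The `for neighbor in neighbors` body of A's `BFS`.  State: (parentArr, identified, queue,
ok); `ok = false` records that the Python raised an IndexError (such inputs lie outside
`Pre_`). `queue.insert(0, v)` is `v :: q`. -/
def pvBFSInner (current : Int) (pa : List Int) (il : List Bool) (q : List Int) :
    List Int → List Int × List Bool × List Int × Bool
  | [] => (pa, il, q, true)
  | w :: rest =>
    match PySem.List.pyGet? il (w - 1) with
    | none => (pa, il, q, false)          -- identified[neighbor-1] raised IndexError
    | some b =>
      if b = false then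
        pvBFSInner current (PySem.List.pySetD pa (w - 1) current)
          (PySem.List.pySetD il (w - 1) true) ((w - 1) :: q) rest
      else
        pvBFSInner current pa il q rest

/-- Each inner step either only pops work or flips one `false` in `identified` to `true`
while pushing one queue entry; used only for `pvBFSWhile`'s termination. -/
lemma pvBFSInner_measure (current : Int) : ∀ (ns : List Int) (pa : List Int) (il : List Bool)
    (q : List Int),
    (pvBFSInner current pa il q ns).2.1.count false + (pvBFSInner current pa il q ns).2.2.1.length
      ≤ il.count false + q.length := by
  intro ns
  induction ns with
  | nil => intro pa il q; simp [pvBFSInner]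
  | cons w rest ih =>
    intro pa il q
    simp only [pvBFSInner]
    cases hg : PySem.List.pyGet? il (w - 1) with
    | none => simp
    | some b =>
      by_cases hb : b = false
      · subst hb
        simp only [reduceIte]
        refine le_trans (ih _ _ _) ?_
        -- the flipped entry: pyGet? and pySet? share the index normalizer pyIdx?
        have hk : ∃ k, PySem.List.pyIdx? il.length (w - 1) = some k ∧ il[k]? = some false := by
          simpa [PySem.List.pyGet?, Option.bind_eq_some_iff] using hg
        obtain ⟨k, hk1, hk2⟩ := hk
        obtain ⟨hklt, hkv⟩ := List.getElem?_eq_some_iff.mp hk2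
        have hset : PySem.List.pySetD il (w - 1) true = il.set k true := by
          simp [PySem.List.pySetD, PySem.List.pySet?, hk1]
        have hcnt : (il.set k true).count false + 1 = il.count false := by
          have h1 : 0 < il.count false := List.count_pos_iff.mpr (hkv ▸ List.getElem_mem hklt)
          have := List.count_set (a := true) (b := false) (l := il) (i := k) hklt
          simp [hkv] at this
          omega
        rw [hset]
        simp only [List.length_cons]
        omega
      · simp only [if_neg hb]
        exact ih _ _ _

/-- A's `while (len(queue) != 0)` loop: pop from the end, scan neighbours. -/
def pvBFSWhile (g : List (Int × List Int)) (pa : List Int) (il : List Bool) (q : List Int) :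
    List Int × List Bool :=
  match hq : q.getLast? with
  | none => (pa, il)
  | some current =>
    match (PySem.Dict.mk g).get? (current + 1) with
    | none => (pa, il)                     -- GTUMap.get returned None: Python raises TypeError
    | some ns =>
      let r := pvBFSInner current pa il q.dropLast ns
      if r.2.2.2 then pvBFSWhile g r.1 r.2.1 r.2.2.1 else (r.1, r.2.1)
  termination_by il.count false + q.length
  decreasing_by
    have h1 := pvBFSInner_measure current ns pa il q.dropLast
    have h2 : q ≠ [] := by
      intro h; rw [h] at hq; simp at hq
    have h3 : q.dropLast.length = q.length - 1 := by simp
    have h4 : 0 < q.length := List.length_pos_iff.mpr h2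
    omega

/-- A's `BFS`. -/
def pvBFS (pa : List Int) (il : List Bool) (start : Int) (g : List (Int × List Int)) :
    List Int × List Bool :=
  match PySem.List.pySet? il (start - 1) true with
  | none => (pa, il)                       -- identified[startVertex-1] raised IndexError
  | some il' => pvBFSWhile g pa il' [start - 1]

def findMinimumCostToLabifyGTU (x : Int) (y : Int) (GTUMap : List (Int × List Int)) : Int :=
  let size := GTUMap.length
  let keys := GTUMap.map Prod.fst
  if x < y then (size : Int) * x
  else
    let r := keys.foldl (fun s k => pvBFS s.1 s.2 k GTUMap)
      (List.replicate size (-1 : Int), List.replicate size false)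
    r.1.foldl (fun cost i => cost + if i = -1 then x else y) 0

-- ===== PORT B =====

/-- B's `find`: follow parent pointers until a fixpoint.  The fuel only makes the Python
`while` total (it is never exhausted on admitted inputs); a missing key is Python's
KeyError, outside `Pre_`. -/
def pvFind (par : PySem.Dict Int Int) : Nat → Int → Int
  | 0, v => v
  | fuel + 1, v =>
    match par.get? v with
    | none => v
    | some p => if p = v then v else pvFind par fuel p

/-- B's loop body for one road `(v, w)`: union by smaller root. -/
def pvUnionStep (n : Nat) (par : PySem.Dict Int Int) (v : Int) (w : Int) :
    PySem.Dict Int Int :=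
  let rv := pvFind par (n + 1) v
  let rw := pvFind par (n + 1) w
  if rv = rw then par
  else if rv < rw then par.insert rw rv
  else par.insert rv rw

def findMinimumCostToLabifyGTU_alt (x : Int) (y : Int) (GTUMap : List (Int × List Int)) : Int :=
  let n := GTUMap.length
  if x < y then (n : Int) * x
  else
    let d := PySem.Dict.mk GTUMap
    let par0 : PySem.Dict Int Int :=
      PySem.Dict.mk ((GTUMap.map Prod.fst).map (fun k => (k, k)))
    -- GTUMap[v]: v is always a key of GTUMap here, so the [] default is never taken
    let par := (GTUMap.map Prod.fst).foldl
      (fun par v => ((d.get? v).getD []).foldl (fun par w => pvUnionStep n par v w) par)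
      par0
    let comp := (PySem.Dict.keys par).foldl
      (fun c v => if par.get? v = some v then c + 1 else c) (0 : Int)
    comp * x + ((n : Int) - comp) * y

-- ===== PRECONDITION & SPEC =====

-- Pre_ excludes (when x ≥ y) maps whose keys or neighbour lists mention vertices outside
-- 1..len(GTUMap), repeat a key, or list a road only in one direction: there A almost always
-- raises (IndexError / TypeError), and where it does return (negative-index wraparound, a
-- one-directional road) the value depends on A's key order and index arithmetic, while B
-- returns the component count of the undirected road map.
def Pre_findMinimumCostToLabifyGTU (x : Int) (y : Int) (GTUMap : List (Int × List Int)) : Prop :=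
  x < y ∨ ((GTUMap.map Prod.fst).Nodup ∧
    (∀ p ∈ GTUMap, (1 ≤ p.1 ∧ p.1 ≤ (GTUMap.length : Int)) ∧
      ∀ w ∈ p.2, 1 ≤ w ∧ w ≤ (GTUMap.length : Int)) ∧
    (∀ p ∈ GTUMap, ∀ w ∈ p.2, ∃ q ∈ GTUMap, q.1 = w ∧ p.1 ∈ q.2))
instance (x : Int) (y : Int) (GTUMap : List (Int × List Int)) : Decidable (Pre_findMinimumCostToLabifyGTU x y GTUMap) := by unfold Pre_findMinimumCostToLabifyGTU; infer_instance

def pvWitness_findMinimumCostToLabifyGTU : Int × Int × (List (Int × List Int)) :=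
  (2, 1, [(1, [2]), (2, [1]), (3, [])])

def Spec_findMinimumCostToLabifyGTU (x : Int) (y : Int) (GTUMap : List (Int × List Int)) (out : Int) : Prop := out = findMinimumCostToLabifyGTU_alt x y GTUMap
instance (x : Int) (y : Int) (GTUMap : List (Int × List Int)) (out : Int) : Decidable (Spec_findMinimumCostToLabifyGTU x y GTUMap out) := by unfold Spec_findMinimumCostToLabifyGTU; infer_instance

-- ===== CLAIM (what is proved, stated in full; the proofs are below) =====
def Claim_equal_findMinimumCostToLabifyGTU : Prop := ∀ (x : Int) (y : Int) (GTUMap : List (Int × List Int)), Dom_findMinimumCostToLabifyGTU x y GTUMap → Pre_findMinimumCostToLabifyGTU x y GTUMap → Spec_findMinimumCostToLabifyGTU x y GTUMap (findMinimumCostToLabifyGTU x y GTUMap)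


-- ===== LEMMAS AND PROOFS =====

-- ---- ghost pointer-queue BFS (proof-side only: the intermediary between A's BFS and conn) ----

/-- Ghost neighbour loop: mark unvisited neighbours, append them. -/
def pvAltInner (vis : PySem.Set Int) (q : List Int) : List Int → PySem.Set Int × List Int
  | [] => (vis, q)
  | w :: rest =>
    if PySem.Set.contains vis w then pvAltInner vis q rest
    else pvAltInner (PySem.Set.add vis w) (q ++ [w]) rest

/-- Each ghost inner step moves one element of the neighbour pool out of "unvisited"; used
only for `pvAltWhile`'s termination. -/
lemma pvAltInner_measure (F : List Int) : ∀ (ns : List Int) (vis : PySem.Set Int)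
    (q : List Int), (∀ w ∈ ns, w ∈ F) →
    (pvAltInner vis q ns).2.length
        + F.countP (fun z => !(PySem.Set.contains (pvAltInner vis q ns).1 z))
      ≤ q.length + F.countP (fun z => !(PySem.Set.contains vis z)) := by
  intro ns
  induction ns with
  | nil => intro vis q _; simp [pvAltInner]
  | cons w rest ih =>
    intro vis q hns
    simp only [pvAltInner]
    by_cases hw : PySem.Set.contains vis w
    · simp only [if_pos hw]
      exact ih vis q (fun z hz => hns z (List.mem_cons_of_mem _ hz))
    · simp only [if_neg hw]
      refine le_trans (ih _ _ (fun z hz => hns z (List.mem_cons_of_mem _ hz))) ?_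
      have hcont : ∀ (s : PySem.Set Int) (z : Int), PySem.Set.contains s z = true ↔ z ∈ s := by
        intro s z
        simp [PySem.Set.contains, List.contains_eq_mem]
      have hmono : ∀ z ∈ F, (!(PySem.Set.contains (PySem.Set.add vis w) z)) = true →
          (!(PySem.Set.contains vis z)) = true := by
        intro z _ hz
        cases h : PySem.Set.contains vis z
        · rfl
        · exfalso
          have hzin : z ∈ vis := (hcont _ _).mp h
          have : PySem.Set.contains (PySem.Set.add vis w) z = true :=
            (hcont _ _).mpr ((PySem.Set.mem_add vis w z).mpr (Or.inl hzin))
          rw [this] at hz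
          simp at hz
      have hlt : F.countP (fun z => !(PySem.Set.contains (PySem.Set.add vis w) z))
          < F.countP (fun z => !(PySem.Set.contains vis z)) := by
        obtain ⟨F1, F2, rfl⟩ := List.append_of_mem (hns w (List.mem_cons_self))
        rw [List.countP_append, List.countP_append, List.countP_cons, List.countP_cons]
        have hF1 := List.countP_mono_left (l := F1)
          (fun z hz => hmono z (by simp [hz]))
        have hF2 := List.countP_mono_left (l := F2)
          (fun z hz => hmono z (by simp [hz]))
        have hwv : (!(PySem.Set.contains vis w)) = true := by
          cases h : PySem.Set.contains vis w
          · rfl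
          · exact absurd h hw
        have hwv' : (!(PySem.Set.contains (PySem.Set.add vis w) w)) = false := by
          have : PySem.Set.contains (PySem.Set.add vis w) w = true :=
            (hcont _ _).mpr ((PySem.Set.mem_add vis w w).mpr (Or.inr rfl))
          rw [this]
          rfl
        rw [hwv, hwv']
        have e1 : (if false = true then 1 else 0) = 0 := by simp
        have e2 : (if true = true then 1 else 0) = 1 := by simp
        rw [e1, e2]
        omega
      simp only [List.length_append, List.length_singleton]
      omega

/-- Ghost pointer-queue BFS loop: `pending` is `queue[head:]`. -/
def pvAltWhile (g : List (Int × List Int)) (vis : PySem.Set Int) (pending : List Int) :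
    PySem.Set Int :=
  match pending with
  | [] => vis
  | current :: rest =>
    match hg : (PySem.Dict.mk g).get? current with
    | none => vis
    | some ns =>
      let r := pvAltInner vis rest ns
      pvAltWhile g r.1 r.2
  termination_by pending.length + (g.flatMap Prod.snd).countP (fun z => !(PySem.Set.contains vis z))
  decreasing_by
    have hns : ∀ w ∈ ns, w ∈ g.flatMap Prod.snd := by
      intro w hw
      have := PySem.Dict.mem_items_of_get?_eq_some _ hg
      exact List.mem_flatMap.mpr ⟨(current, ns), this, hw⟩
    have h1 := pvAltInner_measure (g.flatMap Prod.snd) ns vis rest hns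
    simp only [List.length_cons]
    omega

-- ---- well-formedness and the basic dictionaries-as-graphs facts ----

/-- The `x ≥ y` part of `Pre_`: keys and neighbours in 1..n, unique keys, symmetric roads. -/
def pvWF (g : List (Int × List Int)) : Prop :=
  (g.map Prod.fst).Nodup ∧
    (∀ p ∈ g, (1 ≤ p.1 ∧ p.1 ≤ (g.length : Int)) ∧
      ∀ w ∈ p.2, 1 ≤ w ∧ w ≤ (g.length : Int)) ∧
    (∀ p ∈ g, ∀ w ∈ p.2, ∃ q ∈ g, q.1 = w ∧ p.1 ∈ q.2)

/-- `identified` (a boolean array over indices 0..n-1) denotes the same vertex set as `vis`. -/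
def pvRel (n : Nat) (il : List Bool) (vis : List Int) : Prop :=
  (∀ v ∈ vis, 1 ≤ v ∧ v ≤ (n : Int)) ∧
    ∀ j : Nat, j < n → (il.getD j false = true ↔ ((j : Int) + 1) ∈ vis)

/-- All neighbours of `v` lie in `vis`. -/
def pvNbrs (g : List (Int × List Int)) (vis : List Int) (v : Int) : Prop :=
  ∀ ns, (PySem.Dict.mk g).get? v = some ns → ∀ w ∈ ns, w ∈ vis

/-- Parent entries are still -1 wherever `identified` is false. -/
def pvPar (n : Nat) (pa : List Int) (il : List Bool) : Prop :=
  ∀ j : Nat, j < n → il.getD j false = false → pa.getD j 0 = -1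

lemma pv_contains_mem (s : PySem.Set Int) (x : Int) :
    PySem.Set.contains s x = true ↔ x ∈ s := by
  simp [PySem.Set.contains, List.contains_eq_mem]

lemma pvKeysFinset (g : List (Int × List Int)) (hwf : pvWF g) :
    (g.map Prod.fst).toFinset = Finset.Icc (1 : Int) (g.length : Int) := by
  obtain ⟨hnd, hb, _⟩ := hwf
  have hsub : (g.map Prod.fst).toFinset ⊆ Finset.Icc (1 : Int) (g.length : Int) := by
    intro k hk
    rw [List.mem_toFinset] at hk
    obtain ⟨p, hp, rfl⟩ := List.mem_map.mp hk
    exact Finset.mem_Icc.mpr ⟨(hb p hp).1.1, (hb p hp).1.2⟩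
  have hcard : (Finset.Icc (1 : Int) (g.length : Int)).card = g.length := by
    rw [Int.card_Icc]; omega
  have hlen : (g.map Prod.fst).toFinset.card = g.length := by
    rw [List.toFinset_card_of_nodup hnd, List.length_map]
  exact Finset.eq_of_subset_of_card_le hsub (by omega)

lemma pv_keys_cover (g : List (Int × List Int)) (hwf : pvWF g) :
    ∀ v : Int, 1 ≤ v → v ≤ (g.length : Int) → v ∈ g.map Prod.fst := by
  intro v h1 h2
  have hv : v ∈ (g.map Prod.fst).toFinset := by
    rw [pvKeysFinset g hwf]; exact Finset.mem_Icc.mpr ⟨h1, h2⟩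
  exact List.mem_toFinset.mp hv

lemma pv_get_spec (g : List (Int × List Int)) (hwf : pvWF g) (v : Int) (h1 : 1 ≤ v)
    (h2 : v ≤ (g.length : Int)) :
    ∃ ns, (PySem.Dict.mk g).get? v = some ns ∧ ∀ w ∈ ns, 1 ≤ w ∧ w ≤ (g.length : Int) := by
  have hv : v ∈ g.map Prod.fst := pv_keys_cover g hwf v h1 h2
  cases hg : (PySem.Dict.mk g).get? v with
  | none =>
    exfalso
    have := (PySem.Dict.get?_eq_none_iff_not_mem_keys (PySem.Dict.mk g) v).mp hg
    rw [PySem.Dict.keys_mk] at this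
    exact this hv
  | some ns =>
    refine ⟨ns, rfl, ?_⟩
    have hmem : (v, ns) ∈ g := PySem.Dict.mem_items_of_get?_eq_some _ hg
    exact fun w hw => (hwf.2.1 (v, ns) hmem).2 w hw

lemma pv_il_elem (n : Nat) (il : List Bool) (vis : List Int) (hrel : pvRel n il vis)
    (hil : il.length = n) (w : Int) (h1 : 1 ≤ w) (h2 : w ≤ (n : Int)) :
    ∃ hj : (w - 1).toNat < il.length,
      PySem.List.pyGet? il (w - 1) = some il[(w - 1).toNat] ∧
      (il[(w - 1).toNat] = true ↔ w ∈ vis) := by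
  have h0 : (0 : Int) ≤ w - 1 := by omega
  have hj : (w - 1).toNat < il.length := by rw [hil]; omega
  have hjn : (w - 1).toNat < n := hil ▸ hj
  refine ⟨hj, ?_, ?_⟩
  · rw [PySem.List.pyGet?_of_nonneg il h0, List.getElem?_eq_getElem hj]
  · have hiff := hrel.2 (w - 1).toNat hjn
    rw [List.getD_eq_getElem il false hj] at hiff
    have hc : (((w - 1).toNat : Int)) + 1 = w := by omega
    rw [hc] at hiff
    exact hiff

lemma pv_rel_mark (n : Nat) (il : List Bool) (vis : PySem.Set Int) (w : Int)
    (hrel : pvRel n il vis) (hil : il.length = n) (h1 : 1 ≤ w) (h2 : w ≤ (n : Int))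
    (hnm : w ∉ vis) : pvRel n (il.set (w - 1).toNat true) (PySem.Set.add vis w) := by
  constructor
  · intro v hv
    rcases (PySem.Set.mem_add vis w v).mp hv with h | h
    · exact hrel.1 v h
    · subst h; exact ⟨h1, h2⟩
  · intro j hj
    have hjl : j < (il.set (w - 1).toNat true).length := by
      rw [List.length_set, hil]; exact hj
    rw [List.getD_eq_getElem _ _ hjl, List.getElem_set]
    by_cases he : (w - 1).toNat = j
    · rw [if_pos he]
      have hw : (j : Int) + 1 = w := by omega
      rw [hw]
      simp only [true_iff]
      exact (PySem.Set.mem_add vis w w).mpr (Or.inr rfl)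
    · rw [if_neg he]
      have hbase := hrel.2 j hj
      rw [List.getD_eq_getElem il false (by rw [hil]; exact hj)] at hbase
      rw [hbase]
      constructor
      · intro h; exact (PySem.Set.mem_add vis w _).mpr (Or.inl h)
      · intro h
        rcases (PySem.Set.mem_add vis w _).mp h with h | h
        · exact h
        · exfalso; exact he (by omega)

lemma pv_par_mark_il (n : Nat) (pa : List Int) (il : List Bool) (jw : Nat)
    (hpar : pvPar n pa il) (hil : il.length = n) :
    pvPar n pa (il.set jw true) := by
  intro j hj hf
  have hjl : j < (il.set jw true).length := by rw [List.length_set, hil]; exact hj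
  rw [List.getD_eq_getElem _ _ hjl, List.getElem_set] at hf
  by_cases he : jw = j
  · rw [if_pos he] at hf; cases hf
  · rw [if_neg he] at hf
    exact hpar j hj (by rw [List.getD_eq_getElem il false (by rw [hil]; exact hj)]; exact hf)

lemma pv_par_mark (n : Nat) (pa : List Int) (il : List Bool) (jw : Nat) (c : Int)
    (hpar : pvPar n pa il) (hil : il.length = n) (hpa : pa.length = n) :
    pvPar n (pa.set jw c) (il.set jw true) := by
  intro j hj hf
  have hjl : j < (il.set jw true).length := by rw [List.length_set, hil]; exact hj
  rw [List.getD_eq_getElem _ _ hjl, List.getElem_set] at hf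
  by_cases he : jw = j
  · rw [if_pos he] at hf; cases hf
  · rw [if_neg he] at hf
    have hjp : j < (pa.set jw c).length := by rw [List.length_set, hpa]; exact hj
    rw [List.getD_eq_getElem _ _ hjp, List.getElem_set, if_neg he]
    have := hpar j hj (by rw [List.getD_eq_getElem il false (by rw [hil]; exact hj)]; exact hf)
    rw [List.getD_eq_getElem pa 0 (by rw [hpa]; exact hj)] at this
    exact this

lemma pv_count_mark (il : List Bool) (jw : Nat) (hj : jw < il.length)
    (hf : il[jw] = false) : (il.set jw true).count true = il.count true + 1 := by
  have h := List.count_set (a := true) (b := true) (l := il) (i := jw) hj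
  rw [hf] at h
  simp at h
  omega

lemma pv_count_pa (pa : List Int) (jw : Nat) (hj : jw < pa.length) (hv : pa[jw] = -1)
    (c : Int) (hc : ¬ c = -1) : (pa.set jw c).count (-1) + 1 = pa.count (-1) := by
  have h1 : 0 < pa.count (-1) := List.count_pos_iff.mpr (hv ▸ List.getElem_mem hj)
  have h := List.count_set (a := c) (b := (-1 : Int)) (l := pa) (i := jw) hj
  rw [hv] at h
  simp [hc] at h
  omega

lemma pv_nbrs_mono (g : List (Int × List Int)) (vis vis' : List Int) (v : Int)
    (h : pvNbrs g vis v) (hsub : ∀ z ∈ vis, z ∈ vis') : pvNbrs g vis' v :=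
  fun ns hns w hw => hsub _ (h ns hns w hw)

lemma pvBFSWhile_nil (g : List (Int × List Int)) (pa : List Int) (il : List Bool) :
    pvBFSWhile g pa il [] = (pa, il) := by
  rw [pvBFSWhile]
  rfl

lemma pvBFSWhile_step (g : List (Int × List Int)) (pa : List Int) (il : List Bool)
    (q0 : List Int) (c : Int) (ns : List Int) (pa1 : List Int) (il1 : List Bool)
    (q1 : List Int) (hg : (PySem.Dict.mk g).get? (c + 1) = some ns)
    (hI : pvBFSInner c pa il q0 ns = (pa1, il1, q1, true)) :
    pvBFSWhile g pa il (q0 ++ [c]) = pvBFSWhile g pa1 il1 q1 := by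
  rw [pvBFSWhile]
  split
  · next heq => rw [List.getLast?_concat] at heq; cases heq
  · next cur heq =>
    rw [List.getLast?_concat] at heq
    injection heq with h
    subst h
    rw [hg]
    simp only [List.dropLast_concat, hI]
    rw [if_pos trivial]

lemma pvAltWhile_nil (g : List (Int × List Int)) (vis : PySem.Set Int) :
    pvAltWhile g vis [] = vis := by
  rw [pvAltWhile]

lemma pvAltWhile_cons (g : List (Int × List Int)) (vis : PySem.Set Int) (c : Int)
    (rest ns : List Int) (vis1 : PySem.Set Int) (pend1 : List Int)
    (hg : (PySem.Dict.mk g).get? c = some ns)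
    (hI : pvAltInner vis rest ns = (vis1, pend1)) :
    pvAltWhile g vis (c :: rest) = pvAltWhile g vis1 pend1 := by
  rw [pvAltWhile]
  split
  · next heq => rw [hg] at heq; cases heq
  · next ns' heq =>
    rw [hg] at heq
    injection heq with h
    subst h
    simp only [hI]

lemma pvInnerNoop (c : Int) : ∀ (ns : List Int) (pa : List Int) (il : List Bool) (q : List Int),
    (∀ w ∈ ns, PySem.List.pyGet? il (w - 1) = some true) →
    pvBFSInner c pa il q ns = (pa, il, q, true) := by
  intro ns
  induction ns with
  | nil => intro pa il q _; rfl
  | cons w rest ih =>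
    intro pa il q h
    simp only [pvBFSInner, h w List.mem_cons_self]
    rw [if_neg (by simp)]
    exact ih pa il q (fun z hz => h z (List.mem_cons_of_mem _ hz))

-- ---- connectivity of the road map ----

/-- The adjacency list of `v` (empty when `v` is not a key). -/
def pvAdj (g : List (Int × List Int)) (v : Int) : List Int :=
  ((PySem.Dict.mk g).get? v).getD []

/-- One road. -/
def pvStepR (g : List (Int × List Int)) (a b : Int) : Prop := b ∈ pvAdj g a

/-- Connectivity: reachable along roads. -/
def pvConn (g : List (Int × List Int)) : Int → Int → Prop :=
  Relation.ReflTransGen (pvStepR g)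

lemma pvStepR_adj (g : List (Int × List Int)) (a b : Int) (h : pvStepR g a b) :
    ∃ ns, (PySem.Dict.mk g).get? a = some ns ∧ b ∈ ns := by
  unfold pvStepR pvAdj at h
  cases hg : (PySem.Dict.mk g).get? a with
  | none => rw [hg] at h; simp at h
  | some ns => rw [hg] at h; exact ⟨ns, rfl, h⟩

lemma pvStepR_bounds (g : List (Int × List Int)) (hwf : pvWF g) (a b : Int)
    (h : pvStepR g a b) :
    (1 ≤ a ∧ a ≤ (g.length : Int)) ∧ (1 ≤ b ∧ b ≤ (g.length : Int)) := by
  obtain ⟨ns, hg, hb⟩ := pvStepR_adj g a b h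
  have hmem : (a, ns) ∈ g := PySem.Dict.mem_items_of_get?_eq_some _ hg
  exact ⟨(hwf.2.1 (a, ns) hmem).1, (hwf.2.1 (a, ns) hmem).2 b hb⟩

lemma pvStepR_symm (g : List (Int × List Int)) (hwf : pvWF g) :
    Symmetric (pvStepR g) := by
  intro a b h
  obtain ⟨ns, hg, hb⟩ := pvStepR_adj g a b h
  have hmem : (a, ns) ∈ g := PySem.Dict.mem_items_of_get?_eq_some _ hg
  obtain ⟨q, hq, hq1, hq2⟩ := hwf.2.2 (a, ns) hmem b hb
  have hnd : (PySem.Dict.mk g).keys.Nodup := by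
    rw [PySem.Dict.keys_mk]; exact hwf.1
  have hget : (PySem.Dict.mk g).get? b = some q.2 := by
    have : (b, q.2) ∈ (PySem.Dict.mk g).items := by
      have : q = (b, q.2) := by
        cases q; simp at hq1; simp [hq1]
      exact this ▸ hq
    exact PySem.Dict.get?_of_mem_items _ this hnd
  unfold pvStepR pvAdj
  rw [hget]
  exact hq2

lemma pvConn_symm (g : List (Int × List Int)) (hwf : pvWF g) {a b : Int}
    (h : pvConn g a b) : pvConn g b a :=
  Relation.ReflTransGen.symmetric (pvStepR_symm g hwf) h

-- ---- the canonical representative: the smallest vertex of a component ----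

/-- The least vertex connected to `v` (and `v` itself outside 1..n). -/
noncomputable def pvRG (g : List (Int × List Int)) (v : Int) : Int :=
  letI := Classical.decPred (pvConn g v)
  if h : ((Finset.Icc (1 : Int) (g.length : Int)).filter (pvConn g v)).Nonempty
  then ((Finset.Icc (1 : Int) (g.length : Int)).filter (pvConn g v)).min' h else v

lemma pvRG_spec (g : List (Int × List Int)) (v : Int) (hv : 1 ≤ v ∧ v ≤ (g.length : Int)) :
    pvConn g v (pvRG g v) ∧ (1 ≤ pvRG g v ∧ pvRG g v ≤ (g.length : Int)) ∧
      ∀ w, pvConn g v w → 1 ≤ w → w ≤ (g.length : Int) → pvRG g v ≤ w := by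
  unfold pvRG
  letI := Classical.decPred (pvConn g v)
  have hne : ((Finset.Icc (1 : Int) (g.length : Int)).filter (pvConn g v)).Nonempty :=
    ⟨v, Finset.mem_filter.mpr ⟨Finset.mem_Icc.mpr hv, Relation.ReflTransGen.refl⟩⟩
  rw [dif_pos hne]
  have hmem := Finset.min'_mem _ hne
  rw [Finset.mem_filter, Finset.mem_Icc] at hmem
  refine ⟨hmem.2, hmem.1, ?_⟩
  intro w hw h1 h2
  exact Finset.min'_le _ _ (Finset.mem_filter.mpr ⟨Finset.mem_Icc.mpr ⟨h1, h2⟩, hw⟩)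

lemma pvRG_eq_of_conn (g : List (Int × List Int)) (hwf : pvWF g) (v w : Int)
    (hv : 1 ≤ v ∧ v ≤ (g.length : Int)) (h : pvConn g v w) : pvRG g v = pvRG g w := by
  have hset : ∀ u, u ∈ Finset.Icc (1 : Int) (g.length : Int) →
      (pvConn g v u ↔ pvConn g w u) := by
    intro u _
    constructor
    · intro h2; exact Relation.ReflTransGen.trans (pvConn_symm g hwf h) h2
    · intro h2; exact Relation.ReflTransGen.trans h h2
  unfold pvRG
  letI := Classical.decPred (pvConn g v)
  letI := Classical.decPred (pvConn g w)
  have heq : (Finset.Icc (1 : Int) (g.length : Int)).filter (pvConn g v)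
      = (Finset.Icc (1 : Int) (g.length : Int)).filter (pvConn g w) :=
    Finset.filter_congr hset
  have hne : ((Finset.Icc (1 : Int) (g.length : Int)).filter (pvConn g v)).Nonempty :=
    ⟨v, Finset.mem_filter.mpr ⟨Finset.mem_Icc.mpr hv, Relation.ReflTransGen.refl⟩⟩
  have hne' : ((Finset.Icc (1 : Int) (g.length : Int)).filter (pvConn g w)).Nonempty := by
    rw [← heq]; exact hne
  rw [dif_pos hne, dif_pos hne']
  congr 1

lemma pvConn_of_rg_eq (g : List (Int × List Int)) (hwf : pvWF g) (v w : Int)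
    (hv : 1 ≤ v ∧ v ≤ (g.length : Int)) (hw : 1 ≤ w ∧ w ≤ (g.length : Int))
    (h : pvRG g v = pvRG g w) : pvConn g v w := by
  have h1 := (pvRG_spec g v hv).1
  have h2 := (pvRG_spec g w hw).1
  rw [h] at h1
  exact Relation.ReflTransGen.trans h1 (pvConn_symm g hwf h2)

lemma pvRG_idem (g : List (Int × List Int)) (hwf : pvWF g) (v : Int)
    (hv : 1 ≤ v ∧ v ≤ (g.length : Int)) : pvRG g (pvRG g v) = pvRG g v := by
  have h1 := (pvRG_spec g v hv).1
  have h2 := (pvRG_spec g v hv).2.1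
  exact (pvRG_eq_of_conn g hwf (pvRG g v) v h2 (pvConn_symm g hwf h1)).symm ▸
    (pvRG_eq_of_conn g hwf (pvRG g v) v h2 (pvConn_symm g hwf h1))

-- freshness of a key ↔ its component's representative is new
lemma pvFreshBridge (g : List (Int × List Int)) (hwf : pvWF g) (k : Int) (done : List Int)
    (hk : 1 ≤ k ∧ k ≤ (g.length : Int))
    (hdone : ∀ k' ∈ done, 1 ≤ k' ∧ k' ≤ (g.length : Int)) :
    (∃ k' ∈ done, pvConn g k' k) ↔ pvRG g k ∈ (done.map (pvRG g)).toFinset := by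
  rw [List.mem_toFinset, List.mem_map]
  constructor
  · rintro ⟨k', hk', hc⟩
    exact ⟨k', hk', (pvRG_eq_of_conn g hwf k' k (hdone k' hk') hc)⟩
  · rintro ⟨k', hk', he⟩
    exact ⟨k', hk', pvConn_of_rg_eq g hwf k' k (hdone k' hk') hk he⟩

-- counting helpers
lemma pvCardInsertSdiff (a : Int) (s D : Finset Int) (ha : a ∉ D) :
    ((insert a s) \ D).card = (s \ insert a D).card + 1 := by
  have h1 : (insert a s) \ D = insert a (s \ insert a D) := by
    ext u
    simp only [Finset.mem_sdiff, Finset.mem_insert]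
    constructor
    · rintro ⟨hu | hu, hnd⟩
      · exact Or.inl hu
      · by_cases hua : u = a
        · exact Or.inl hua
        · exact Or.inr ⟨hu, fun h => (h.elim hua (fun h2 => hnd h2))⟩
    · rintro (hu | ⟨hu, hnd⟩)
      · exact ⟨Or.inl hu, hu ▸ ha⟩
      · exact ⟨Or.inr hu, fun h => hnd (Or.inr h)⟩
  rw [h1, Finset.card_insert_of_notMem (by simp)]

/-- Inner lockstep: A's neighbour loop and the ghost neighbour loop move related states to
related states. -/
lemma pvInnerLock (g : List (Int × List Int)) (current : Int) (hc1 : 1 ≤ current) :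
    ∀ (ns : List Int) (pa : List Int) (il : List Bool) (vis : PySem.Set Int) (rest : List Int),
    (∀ w ∈ ns, 1 ≤ w ∧ w ≤ (g.length : Int)) →
    il.length = g.length → pa.length = g.length →
    pvRel g.length il vis →
    pvPar g.length pa il →
    ∃ pa' il' vis' pend',
      pvBFSInner (current - 1) pa il ((rest.map (fun v => v - 1)).reverse) ns
        = (pa', il', (pend'.map (fun v => v - 1)).reverse, true) ∧
      pvAltInner vis rest ns = (vis', pend') ∧
      il'.length = g.length ∧ pa'.length = g.length ∧
      pvRel g.length il' vis' ∧ pvPar g.length pa' il' ∧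
      (∀ v ∈ vis, v ∈ vis') ∧ (∀ v ∈ vis', v ∈ vis ∨ v ∈ pend') ∧
      (∀ v ∈ rest, v ∈ pend') ∧ (∀ v ∈ pend', v ∈ rest ∨ v ∈ vis') ∧
      (∀ w ∈ ns, w ∈ vis') ∧
      (∀ v ∈ vis', v ∈ vis ∨ v ∈ ns) ∧ (∀ v ∈ pend', v ∈ rest ∨ v ∈ ns) ∧
      (pa'.count (-1) : Int) + (il'.count true : Int)
        = (pa.count (-1) : Int) + (il.count true : Int) := by
  intro ns
  induction ns with
  | nil =>
    intro pa il vis rest _ hil hpa hrel hpar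
    exact ⟨pa, il, vis, rest, rfl, rfl, hil, hpa, hrel, hpar,
      fun _ hv => hv, fun _ hv => Or.inl hv, fun _ hv => hv, fun _ hv => Or.inl hv,
      fun w hw => absurd hw (List.not_mem_nil),
      fun _ hv => Or.inl hv, fun _ hv => Or.inl hv, rfl⟩
  | cons w rest' ih =>
    intro pa il vis rest hns hil hpa hrel hpar
    obtain ⟨hw1, hw2⟩ := hns w List.mem_cons_self
    have hbounds := fun z hz => hns z (List.mem_cons_of_mem _ hz)
    obtain ⟨hj, hget, hiff⟩ := pv_il_elem g.length il vis hrel hil w hw1 hw2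
    by_cases hmem : w ∈ vis
    · -- already visited: both loops skip this neighbour
      have htrue : il[(w - 1).toNat] = true := hiff.mpr hmem
      have hA : pvBFSInner (current - 1) pa il ((rest.map (fun v => v - 1)).reverse) (w :: rest')
          = pvBFSInner (current - 1) pa il ((rest.map (fun v => v - 1)).reverse) rest' := by
        simp only [pvBFSInner, hget, htrue]
        rw [if_neg (by simp)]
      have hB : pvAltInner vis rest (w :: rest') = pvAltInner vis rest rest' := by
        have hc : PySem.Set.contains vis w = true := (pv_contains_mem _ _).mpr hmem
        simp only [pvAltInner, hc, if_pos]
      obtain ⟨pa', il', vis', pend', hA2, hB2, c3, c4, c5, c6, c7, c8, c9, c10, c11, c13, c14, c12⟩ :=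
        ih pa il vis rest hbounds hil hpa hrel hpar
      exact ⟨pa', il', vis', pend', hA.trans hA2, hB.trans hB2, c3, c4, c5, c6, c7, c8, c9, c10,
        fun z hz => (List.mem_cons.mp hz).elim (fun h => h ▸ c7 w hmem) (fun h => c11 z h),
        fun v hv => (c13 v hv).imp_right (List.mem_cons_of_mem _),
        fun v hv => (c14 v hv).imp_right (List.mem_cons_of_mem _), c12⟩
    · -- fresh neighbour: both loops mark it
      have hfalse : il[(w - 1).toNat] = false := by
        cases h : il[(w - 1).toNat]
        · rfl
        · exact absurd (hiff.mp h) hmem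
      have h0 : (0 : Int) ≤ w - 1 := by omega
      have hsetpa : PySem.List.pySetD pa (w - 1) (current - 1) = pa.set (w - 1).toNat (current - 1) :=
        PySem.List.pySetD_of_nonneg pa _ h0
      have hsetil : PySem.List.pySetD il (w - 1) true = il.set (w - 1).toNat true :=
        PySem.List.pySetD_of_nonneg il _ h0
      have hq : ((w - 1) :: (rest.map (fun v => v - 1)).reverse)
          = (((rest ++ [w]).map (fun v => v - 1)).reverse) := by simp
      have hA : pvBFSInner (current - 1) pa il ((rest.map (fun v => v - 1)).reverse) (w :: rest')
          = pvBFSInner (current - 1) (pa.set (w - 1).toNat (current - 1)) (il.set (w - 1).toNat true)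
              (((rest ++ [w]).map (fun v => v - 1)).reverse) rest' := by
        simp only [pvBFSInner, hget, hfalse]
        rw [if_pos trivial, hsetpa, hsetil, hq]
      have hB : pvAltInner vis rest (w :: rest')
          = pvAltInner (PySem.Set.add vis w) (rest ++ [w]) rest' := by
        have hc : PySem.Set.contains vis w = false := by
          cases h : PySem.Set.contains vis w
          · rfl
          · exact absurd ((pv_contains_mem _ _).mp h) hmem
        simp only [pvAltInner, hc, Bool.false_eq_true, if_neg, if_false]
      have hjn : (w - 1).toNat < g.length := hil ▸ hj
      have hil1 : (il.set (w - 1).toNat true).length = g.length := by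
        rw [List.length_set]; exact hil
      have hpa1 : (pa.set (w - 1).toNat (current - 1)).length = g.length := by
        rw [List.length_set]; exact hpa
      have hrel1 := pv_rel_mark g.length il vis w hrel hil hw1 hw2 hmem
      have hpar1 := pv_par_mark g.length pa il (w - 1).toNat (current - 1) hpar hil hpa
      obtain ⟨pa', il', vis', pend', hA2, hB2, c3, c4, c5, c6, c7, c8, c9, c10, c11, c13, c14, c12⟩ :=
        ih (pa.set (w - 1).toNat (current - 1)) (il.set (w - 1).toNat true)
          (PySem.Set.add vis w) (rest ++ [w]) hbounds hil1 hpa1 hrel1 hpar1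
      have hwin' : w ∈ vis' := c7 w ((PySem.Set.mem_add vis w w).mpr (Or.inr rfl))
      have hjp : (w - 1).toNat < pa.length := by rw [hpa]; exact hjn
      have hpaval : pa[(w - 1).toNat] = -1 := by
        have := hpar (w - 1).toNat hjn
          (by rw [List.getD_eq_getElem il false hj]; exact hfalse)
        rw [List.getD_eq_getElem pa 0 hjp] at this
        exact this
      have hcnt : (pa'.count (-1) : Int) + (il'.count true : Int)
          = (pa.count (-1) : Int) + (il.count true : Int) := by
        have h1 := pv_count_mark il (w - 1).toNat hj hfalse
        have h2 := pv_count_pa pa (w - 1).toNat hjp hpaval (current - 1) (by omega)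
        omega
      refine ⟨pa', il', vis', pend', hA.trans hA2, hB.trans hB2, c3, c4, c5, c6, ?_, ?_, ?_, ?_, ?_, ?_, ?_, hcnt⟩
      · exact fun z hz => c7 z ((PySem.Set.mem_add vis w z).mpr (Or.inl hz))
      · intro v hv
        rcases c8 v hv with h | h
        · rcases (PySem.Set.mem_add vis w v).mp h with h | h
          · exact Or.inl h
          · exact Or.inr (c9 v (h ▸ List.mem_append_right rest (List.mem_singleton.mpr rfl)))
        · exact Or.inr h
      · exact fun z hz => c9 z (List.mem_append_left _ hz)
      · intro v hv
        rcases c10 v hv with h | h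
        · rcases List.mem_append.mp h with h | h
          · exact Or.inl h
          · exact Or.inr (List.mem_singleton.mp h ▸ hwin')
        · exact Or.inr h
      · intro z hz
        rcases List.mem_cons.mp hz with h | h
        · exact h ▸ hwin'
        · exact c11 z h
      · intro v hv
        rcases c13 v hv with h | h
        · rcases (PySem.Set.mem_add vis w v).mp h with h | h
          · exact Or.inl h
          · exact Or.inr (h ▸ List.mem_cons_self)
        · exact Or.inr (List.mem_cons_of_mem _ h)
      · intro v hv
        rcases c14 v hv with h | h
        · rcases List.mem_append.mp h with h | h
          · exact Or.inl h
          · exact Or.inr (List.mem_singleton.mp h ▸ List.mem_cons_self)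
        · exact Or.inr (List.mem_cons_of_mem _ h)

/-- Main lockstep: A's BFS while loop and the ghost while loop keep the states related,
and every newly visited vertex is connected to a pending one. -/
lemma pvLockstep (g : List (Int × List Int)) (hwf : pvWF g) :
    ∀ (fuel : Nat) (pa : List Int) (il : List Bool) (vis : PySem.Set Int) (pending : List Int),
    pending.length + (g.flatMap Prod.snd).countP (fun z => !(PySem.Set.contains vis z)) ≤ fuel →
    il.length = g.length → pa.length = g.length →
    pvRel g.length il vis →
    (∀ v ∈ pending, v ∈ vis) →
    (∀ v ∈ vis, v ∈ pending ∨ pvNbrs g vis v) →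
    pvPar g.length pa il →
    ∃ pa' il',
      pvBFSWhile g pa il ((pending.map (fun v => v - 1)).reverse) = (pa', il') ∧
      il'.length = g.length ∧ pa'.length = g.length ∧
      pvRel g.length il' (pvAltWhile g vis pending) ∧
      pvPar g.length pa' il' ∧
      (∀ v ∈ (pvAltWhile g vis pending), pvNbrs g (pvAltWhile g vis pending) v) ∧
      (∀ v ∈ vis, v ∈ pvAltWhile g vis pending) ∧
      (∀ v ∈ pvAltWhile g vis pending, v ∈ vis ∨ ∃ p ∈ pending, pvConn g p v) ∧
      (pa'.count (-1) : Int) + (il'.count true : Int)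
        = (pa.count (-1) : Int) + (il.count true : Int) := by
  intro fuel
  induction fuel with
  | zero =>
    intro pa il vis pending hfuel hil hpa hrel hpend hpc hpar
    have hp : pending = [] := by
      cases pending with
      | nil => rfl
      | cons a b => simp at hfuel
    subst hp
    rw [pvAltWhile_nil]
    refine ⟨pa, il, ?_, hil, hpa, hrel, hpar, ?_, fun v hv => hv, fun v hv => Or.inl hv, rfl⟩
    · simp only [List.map_nil, List.reverse_nil]
      exact pvBFSWhile_nil g pa il
    · intro v hv
      rcases hpc v hv with h | h
      · exact absurd h (List.not_mem_nil)
      · exact h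
  | succ fuel ih =>
    intro pa il vis pending hfuel hil hpa hrel hpend hpc hpar
    cases pending with
    | nil =>
      rw [pvAltWhile_nil]
      refine ⟨pa, il, ?_, hil, hpa, hrel, hpar, ?_, fun v hv => hv, fun v hv => Or.inl hv, rfl⟩
      · simp only [List.map_nil, List.reverse_nil]
        exact pvBFSWhile_nil g pa il
      · intro v hv
        rcases hpc v hv with h | h
        · exact absurd h (List.not_mem_nil)
        · exact h
    | cons current rest =>
      have hcv : current ∈ vis := hpend current List.mem_cons_self
      obtain ⟨hc1, hc2⟩ := hrel.1 current hcv
      obtain ⟨ns, hg, hnsb⟩ := pv_get_spec g hwf current hc1 hc2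
      obtain ⟨pa1, il1, vis1, pend1, hA1, hB1, hil1, hpa1, hrel1, hpar1, hsub1, hcls1, hrest1,
        hpend1b, hns1, hvo1, hpo1, hcnt1⟩ :=
        pvInnerLock g current hc1 ns pa il vis rest hnsb hil hpa hrel hpar
      have hBchain : pvAltWhile g vis (current :: rest) = pvAltWhile g vis1 pend1 :=
        pvAltWhile_cons g vis current rest ns vis1 pend1 hg hB1
      have hg' : (PySem.Dict.mk g).get? ((current - 1) + 1) = some ns := by
        have he : current - 1 + 1 = current := by ring
        rw [he]; exact hg
      have hAchain : pvBFSWhile g pa il (((current :: rest).map (fun v => v - 1)).reverse)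
          = pvBFSWhile g pa1 il1 ((pend1.map (fun v => v - 1)).reverse) := by
        have hqA : (((current :: rest).map (fun v => v - 1)).reverse)
            = (rest.map (fun v => v - 1)).reverse ++ [current - 1] := by simp
        rw [hqA]
        exact pvBFSWhile_step g pa il ((rest.map (fun v => v - 1)).reverse) (current - 1) ns
          pa1 il1 ((pend1.map (fun v => v - 1)).reverse) hg' hA1
      have hnsconn : ∀ w ∈ ns, pvConn g current w := by
        intro w hw
        refine Relation.ReflTransGen.single ?_
        unfold pvStepR pvAdj
        rw [hg]
        exact hw
      have hns' : ∀ w ∈ ns, w ∈ g.flatMap Prod.snd := by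
        intro w hw
        have := PySem.Dict.mem_items_of_get?_eq_some _ hg
        exact List.mem_flatMap.mpr ⟨(current, ns), this, hw⟩
      have hmeas : pend1.length
          + (g.flatMap Prod.snd).countP (fun z => !(PySem.Set.contains vis1 z)) ≤ fuel := by
        have hm := pvAltInner_measure (g.flatMap Prod.snd) ns vis rest hns'
        rw [hB1] at hm
        simp only at hm
        simp only [List.length_cons] at hfuel
        omega
      have hpend' : ∀ v ∈ pend1, v ∈ vis1 := by
        intro v hv
        rcases hpend1b v hv with h | h
        · exact hsub1 v (hpend v (List.mem_cons_of_mem _ h))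
        · exact h
      have hpc' : ∀ v ∈ vis1, v ∈ pend1 ∨ pvNbrs g vis1 v := by
        intro v hv
        rcases hcls1 v hv with h | h
        · rcases hpc v h with h2 | h2
          · rcases List.mem_cons.mp h2 with h3 | h3
            · subst h3
              right
              intro ns' hns2 w hwmem
              rw [hg] at hns2
              injection hns2 with he
              subst he
              exact hns1 w hwmem
            · exact Or.inl (hrest1 v h3)
          · exact Or.inr (pv_nbrs_mono g vis vis1 v h2 hsub1)
        · exact Or.inl h
      obtain ⟨pa', il', hA', hil', hpa', hrel', hpar', hcls', hsub', hSnd', hcnt'⟩ :=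
        ih pa1 il1 vis1 pend1 hmeas hil1 hpa1 hrel1 hpend' hpc' hpar1
      rw [hBchain, hAchain]
      refine ⟨pa', il', hA', hil', hpa', hrel', hpar', hcls',
        fun v hv => hsub' v (hsub1 v hv), ?_, by omega⟩
      intro v hv
      rcases hSnd' v hv with h | ⟨p, hp, hc⟩
      · rcases hvo1 v h with h2 | h2
        · exact Or.inl h2
        · exact Or.inr ⟨current, List.mem_cons_self, hnsconn v h2⟩
      · rcases hpo1 p hp with h2 | h2
        · exact Or.inr ⟨p, List.mem_cons_of_mem _ h2, hc⟩
        · exact Or.inr ⟨current, List.mem_cons_self,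
            Relation.ReflTransGen.trans (hnsconn p h2) hc⟩

/-- A's BFS from an already-identified start is a no-op. -/
lemma pvRun_old (g : List (Int × List Int)) (hwf : pvWF g) (pa : List Int) (il : List Bool)
    (vis : PySem.Set Int) (start : Int) (hs : start ∈ vis)
    (hil : il.length = g.length)
    (hrel : pvRel g.length il vis)
    (hcl : ∀ v ∈ vis, pvNbrs g vis v) :
    pvBFS pa il start g = (pa, il) := by
  obtain ⟨h1, h2⟩ := hrel.1 start hs
  obtain ⟨hj, _, hiff⟩ := pv_il_elem g.length il vis hrel hil start h1 h2
  have htrue : il[(start - 1).toNat] = true := hiff.mpr hs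
  have hset : PySem.List.pySet? il (start - 1) true = some il := by
    have he : (start - 1) = (((start - 1).toNat : Nat) : Int) := by omega
    rw [he, PySem.List.pySet?_natCast il _ true hj]
    congr 1
    conv_lhs => rw [show (true : Bool) = il[(start - 1).toNat] from htrue.symm]
    exact List.set_getElem_self hj
  obtain ⟨ns, hg, hnsb⟩ := pv_get_spec g hwf start h1 h2
  have hg' : (PySem.Dict.mk g).get? ((start - 1) + 1) = some ns := by
    have he : start - 1 + 1 = start := by ring
    rw [he]; exact hg
  have hnoop : pvBFSInner (start - 1) pa il [] ns = (pa, il, [], true) := by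
    apply pvInnerNoop
    intro w hw
    obtain ⟨hw1, hw2⟩ := hnsb w hw
    have hwin : w ∈ vis := hcl start hs ns hg w hw
    obtain ⟨hjw, hgw, hiw⟩ := pv_il_elem g.length il vis hrel hil w hw1 hw2
    rw [hgw]
    exact congrArg some (hiw.mpr hwin)
  unfold pvBFS
  split
  · next heq => simp [hset] at heq
  · next il2 heq =>
    rw [hset] at heq
    injection heq with h
    subst h
    have he : [start - 1] = ([] : List Int) ++ [start - 1] := rfl
    rw [he, pvBFSWhile_step g pa il [] (start - 1) ns pa il [] hg' hnoop]
    exact pvBFSWhile_nil g pa il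

/-- A's BFS from a fresh start runs in lockstep with the ghost BFS; the new visited set is
exactly the old one plus `start`'s component. -/
lemma pvRun_new (g : List (Int × List Int)) (hwf : pvWF g) (pa : List Int) (il : List Bool)
    (vis : PySem.Set Int) (start : Int) (hs : start ∉ vis)
    (h1 : 1 ≤ start) (h2 : start ≤ (g.length : Int))
    (hil : il.length = g.length) (hpa : pa.length = g.length)
    (hrel : pvRel g.length il vis)
    (hcl : ∀ v ∈ vis, pvNbrs g vis v)
    (hpar : pvPar g.length pa il) :
    ∃ pa' il',
      pvBFS pa il start g = (pa', il') ∧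
      il'.length = g.length ∧ pa'.length = g.length ∧
      pvRel g.length il' (pvAltWhile g (PySem.Set.add vis start) [start]) ∧
      pvPar g.length pa' il' ∧
      (∀ v ∈ (pvAltWhile g (PySem.Set.add vis start) [start]),
        pvNbrs g (pvAltWhile g (PySem.Set.add vis start) [start]) v) ∧
      (∀ v, v ∈ pvAltWhile g (PySem.Set.add vis start) [start] ↔
        (v ∈ vis ∨ pvConn g start v)) ∧
      (pa'.count (-1) : Int) + (il'.count true : Int)
        = (pa.count (-1) : Int) + (il.count true : Int) + 1 := by
  obtain ⟨hj, _, hiff⟩ := pv_il_elem g.length il vis hrel hil start h1 h2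
  have hfalse : il[(start - 1).toNat] = false := by
    cases h : il[(start - 1).toNat]
    · rfl
    · exact absurd (hiff.mp h) hs
  have hset : PySem.List.pySet? il (start - 1) true = some (il.set (start - 1).toNat true) := by
    have he : (start - 1) = (((start - 1).toNat : Nat) : Int) := by omega
    conv_lhs => rw [he]
    rw [PySem.List.pySet?_natCast il _ true hj]
  have hil1 : (il.set (start - 1).toNat true).length = g.length := by
    rw [List.length_set]; exact hil
  have hrel1 := pv_rel_mark g.length il vis start hrel hil h1 h2 hs
  have hpar1 := pv_par_mark_il g.length pa il (start - 1).toNat hpar hil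
  obtain ⟨pa', il', hA', hil', hpa', hrel', hpar', hcls', hsub', hSnd', hcnt'⟩ :=
    pvLockstep g hwf
      (1 + (g.flatMap Prod.snd).countP (fun z => !(PySem.Set.contains (PySem.Set.add vis start) z)))
      pa (il.set (start - 1).toNat true) (PySem.Set.add vis start) [start]
      (by simp) hil1 hpa hrel1
      (fun v hv => (List.mem_singleton.mp hv) ▸ (PySem.Set.mem_add vis start start).mpr (Or.inr rfl))
      (by
        intro v hv
        rcases (PySem.Set.mem_add vis start v).mp hv with h | h
        · exact Or.inr (pv_nbrs_mono g vis _ v (hcl v h)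
            (fun z hz => (PySem.Set.mem_add vis start z).mpr (Or.inl hz)))
        · exact Or.inl (h ▸ List.mem_singleton.mpr rfl))
      hpar1
  have hstart : start ∈ pvAltWhile g (PySem.Set.add vis start) [start] :=
    hsub' start ((PySem.Set.mem_add vis start start).mpr (Or.inr rfl))
  have hchar : ∀ v, v ∈ pvAltWhile g (PySem.Set.add vis start) [start] ↔
      (v ∈ vis ∨ pvConn g start v) := by
    intro v
    constructor
    · intro hv
      rcases hSnd' v hv with h | ⟨p, hp, hc⟩
      · rcases (PySem.Set.mem_add vis start v).mp h with h2 | h2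
        · exact Or.inl h2
        · exact Or.inr (h2 ▸ Relation.ReflTransGen.refl)
      · exact Or.inr ((List.mem_singleton.mp hp) ▸ hc)
    · rintro (hv | hv)
      · exact hsub' v ((PySem.Set.mem_add vis start v).mpr (Or.inl hv))
      · induction hv with
        | refl => exact hstart
        | tail hab hstep ihv =>
          obtain ⟨ns', hg', hc'⟩ := pvStepR_adj g _ _ hstep
          exact hcls' _ ihv ns' hg' _ hc'
  refine ⟨pa', il', ?_, hil', hpa', hrel', hpar', hcls', hchar, ?_⟩
  · unfold pvBFS
    split
    · next heq => simp [hset] at heq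
    · next il2 heq =>
      rw [hset] at heq
      injection heq with h
      subst h
      have hq : [start - 1] = (([start].map (fun v => v - 1)).reverse) := by simp
      rw [hq]
      exact hA'
  · have hc := pv_count_mark il (start - 1).toNat hj hfalse
    omega

/-- Outer lockstep over the key list: A's fold and the ghost fold stay related, and the
ghost component counter counts exactly the new component representatives among `ks`. -/
lemma pvOuter (g : List (Int × List Int)) (hwf : pvWF g) :
    ∀ (ks done : List Int) (pa : List Int) (il : List Bool) (comp : Int) (vis : PySem.Set Int),
    (∀ k ∈ ks, 1 ≤ k ∧ k ≤ (g.length : Int)) →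
    (∀ k ∈ done, 1 ≤ k ∧ k ≤ (g.length : Int)) →
    (∀ v, v ∈ vis ↔ ∃ k ∈ done, pvConn g k v) →
    il.length = g.length → pa.length = g.length →
    pvRel g.length il vis →
    (∀ v ∈ vis, pvNbrs g vis v) →
    pvPar g.length pa il →
    (pa.count (-1) : Int) + (il.count true : Int) = (g.length : Int) + comp →
    ∃ pa' il' comp' vis',
      ks.foldl (fun s k => pvBFS s.1 s.2 k g) (pa, il) = (pa', il') ∧
      ks.foldl (fun (s : Int × PySem.Set Int) start =>
          if PySem.Set.contains s.2 start then s
          else (s.1 + 1, pvAltWhile g (PySem.Set.add s.2 start) [start])) (comp, vis)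
        = (comp', vis') ∧
      il'.length = g.length ∧ pa'.length = g.length ∧
      pvRel g.length il' vis' ∧
      (∀ k ∈ ks, k ∈ vis') ∧ (∀ v ∈ vis, v ∈ vis') ∧
      (pa'.count (-1) : Int) + (il'.count true : Int) = (g.length : Int) + comp' ∧
      comp' = comp + ((((ks.map (pvRG g)).toFinset) \ ((done.map (pvRG g)).toFinset)).card : Int) := by
  intro ks
  induction ks with
  | nil =>
    intro done pa il comp vis _ _ _ hil hpa hrel _ _ hcnt
    exact ⟨pa, il, comp, vis, rfl, rfl, hil, hpa, hrel,
      fun k hk => absurd hk (List.not_mem_nil), fun _ hv => hv, hcnt, by simp⟩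
  | cons k ks ih =>
    intro done pa il comp vis hks hdone hvis hil hpa hrel hcl hpar hcnt
    obtain ⟨hk1, hk2⟩ := hks k List.mem_cons_self
    have hks' := fun z hz => hks z (List.mem_cons_of_mem _ hz)
    have hdone' : ∀ k' ∈ done ++ [k], 1 ≤ k' ∧ k' ≤ (g.length : Int) := by
      intro k' hk'
      rcases List.mem_append.mp hk' with h | h
      · exact hdone k' h
      · exact (List.mem_singleton.mp h) ▸ ⟨hk1, hk2⟩
    have hDset : ((done ++ [k]).map (pvRG g)).toFinset
        = insert (pvRG g k) ((done.map (pvRG g)).toFinset) := by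
      rw [List.map_append, List.toFinset_append]
      simp [Finset.union_comm]
    by_cases hk : k ∈ vis
    · have hc : PySem.Set.contains vis k = true := (pv_contains_mem _ _).mpr hk
      have hstepA : pvBFS pa il k g = (pa, il) := pvRun_old g hwf pa il vis k hk hil hrel hcl
      have hvis' : ∀ v, v ∈ vis ↔ ∃ k' ∈ done ++ [k], pvConn g k' v := by
        intro v
        rw [hvis v]
        constructor
        · rintro ⟨k', hk', hc'⟩; exact ⟨k', List.mem_append_left _ hk', hc'⟩
        · rintro ⟨k', hk', hc'⟩
          rcases List.mem_append.mp hk' with h | h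
          · exact ⟨k', h, hc'⟩
          · obtain ⟨k0, hk0, hc0⟩ := (hvis k).mp hk
            exact ⟨k0, hk0, Relation.ReflTransGen.trans hc0 ((List.mem_singleton.mp h) ▸ hc')⟩
      obtain ⟨pa', il', comp', vis', hA, hB, c1, c2, c3, c4, c5, c6, c7⟩ :=
        ih (done ++ [k]) pa il comp vis hks' hdone' hvis' hil hpa hrel hcl hpar hcnt
      have hrmem : pvRG g k ∈ (done.map (pvRG g)).toFinset :=
        (pvFreshBridge g hwf k done ⟨hk1, hk2⟩ hdone).mp ((hvis k).mp hk)
      refine ⟨pa', il', comp', vis', ?_, ?_, c1, c2, c3, ?_, c5, c6, ?_⟩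
      · rw [List.foldl_cons]
        simpa [hstepA] using hA
      · rw [List.foldl_cons]
        have hstepB : (if PySem.Set.contains (comp, vis).2 k = true then (comp, vis)
            else ((comp, vis).1 + 1, pvAltWhile g (PySem.Set.add (comp, vis).2 k) [k]))
            = (comp, vis) := by simp [hc, hk]
        rw [hstepB]
        exact hB
      · intro z hz
        rcases List.mem_cons.mp hz with h | h
        · rw [h]; exact c5 k hk
        · exact c4 z h
      · rw [c7, hDset]
        have : (insert (pvRG g k) ((ks.map (pvRG g)).toFinset)) \ ((done.map (pvRG g)).toFinset)
            = ((ks.map (pvRG g)).toFinset) \ ((done.map (pvRG g)).toFinset) :=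
          Finset.insert_sdiff_of_mem _ hrmem
        have hins : (insert (pvRG g k) ((done.map (pvRG g)).toFinset))
            = ((done.map (pvRG g)).toFinset) := Finset.insert_eq_self.mpr hrmem
        simp only [List.map_cons, List.toFinset_cons, hins, this]
    · have hc : PySem.Set.contains vis k = false := by
        cases h : PySem.Set.contains vis k
        · rfl
        · exact absurd ((pv_contains_mem _ _).mp h) hk
      obtain ⟨pa1, il1, hA1, hil1, hpa1, hrel1, hpar1, hcls1, hchar1, hcnt1⟩ :=
        pvRun_new g hwf pa il vis k hk hk1 hk2 hil hpa hrel hcl hpar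
      have hvis1 : ∀ v, v ∈ pvAltWhile g (PySem.Set.add vis k) [k]
          ↔ ∃ k' ∈ done ++ [k], pvConn g k' v := by
        intro v
        rw [hchar1 v]
        constructor
        · rintro (hv | hv)
          · obtain ⟨k', hk', hc'⟩ := (hvis v).mp hv
            exact ⟨k', List.mem_append_left _ hk', hc'⟩
          · exact ⟨k, List.mem_append_right _ (List.mem_singleton.mpr rfl), hv⟩
        · rintro ⟨k', hk', hc'⟩
          rcases List.mem_append.mp hk' with h | h
          · exact Or.inl ((hvis v).mpr ⟨k', h, hc'⟩)
          · exact Or.inr ((List.mem_singleton.mp h) ▸ hc')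
      have hsub1 : ∀ v ∈ vis, v ∈ pvAltWhile g (PySem.Set.add vis k) [k] :=
        fun v hv => (hchar1 v).mpr (Or.inl hv)
      have hkin1 : k ∈ pvAltWhile g (PySem.Set.add vis k) [k] :=
        (hchar1 k).mpr (Or.inr Relation.ReflTransGen.refl)
      obtain ⟨pa', il', comp', vis', hA, hB, c1, c2, c3, c4, c5, c6, c7⟩ :=
        ih (done ++ [k]) pa1 il1 (comp + 1) (pvAltWhile g (PySem.Set.add vis k) [k]) hks'
          hdone' hvis1 hil1 hpa1 hrel1 hcls1 hpar1 (by omega)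
      have hrnew : pvRG g k ∉ (done.map (pvRG g)).toFinset := by
        intro hmem
        exact hk ((hvis k).mpr ((pvFreshBridge g hwf k done ⟨hk1, hk2⟩ hdone).mpr hmem))
      refine ⟨pa', il', comp', vis', ?_, ?_, c1, c2, c3, ?_, fun v hv => c5 v (hsub1 v hv), c6, ?_⟩
      · rw [List.foldl_cons]
        simpa [hA1] using hA
      · rw [List.foldl_cons]
        have hstepB : (if PySem.Set.contains (comp, vis).2 k = true then (comp, vis)
            else ((comp, vis).1 + 1, pvAltWhile g (PySem.Set.add (comp, vis).2 k) [k]))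
            = (comp + 1, pvAltWhile g (PySem.Set.add vis k) [k]) := by simp [hc, hk]
        rw [hstepB]
        exact hB
      · intro z hz
        rcases List.mem_cons.mp hz with h | h
        · rw [h]; exact c5 k hkin1
        · exact c4 z h
      · rw [c7, hDset]
        have hcard := pvCardInsertSdiff (pvRG g k) ((ks.map (pvRG g)).toFinset)
          ((done.map (pvRG g)).toFinset) hrnew
        simp only [List.map_cons, List.toFinset_cons]
        rw [hcard]
        push_cast
        ring

lemma pvCost (x y : Int) : ∀ (pa : List Int) (c : Int),
    pa.foldl (fun cost i => cost + if i = -1 then x else y) c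
      = c + x * (pa.count (-1) : Int) + y * ((pa.length : Int) - (pa.count (-1) : Int)) := by
  intro pa
  induction pa with
  | nil => intro c; simp
  | cons i rest ih =>
    intro c
    simp only [List.foldl_cons, List.count_cons, List.length_cons, ih]
    by_cases hi : i = -1
    · simp [hi]; push_cast; ring
    · simp [hi, beq_iff_eq]; push_cast; ring

-- ---- union-find correctness ----

/-- The root `pvFind` reaches with the canonical fuel. -/
def pvRoot (n : Nat) (par : PySem.Dict Int Int) (v : Int) : Int := pvFind par (n + 1) v

lemma pvFind_fuel (n : Nat) (par : PySem.Dict Int Int)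
    (hpar : ∀ v : Int, 1 ≤ v → v ≤ (n : Int) → ∃ p, par.get? v = some p ∧ 1 ≤ p ∧ p ≤ v) :
    ∀ (m : Nat) (v : Int), v.toNat ≤ m → 1 ≤ v → v ≤ (n : Int) →
    ∀ f1 f2 : Nat, v.toNat ≤ f1 → v.toNat ≤ f2 → pvFind par f1 v = pvFind par f2 v := by
  intro m
  induction m with
  | zero => intro v hm h1 h2; omega
  | succ m ih =>
    intro v hm h1 h2 f1 f2 hf1 hf2
    obtain ⟨p, hp, hp1, hp2⟩ := hpar v h1 h2
    obtain ⟨f1', rfl⟩ : ∃ f, f1 = f + 1 := ⟨f1 - 1, by omega⟩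
    obtain ⟨f2', rfl⟩ : ∃ f, f2 = f + 1 := ⟨f2 - 1, by omega⟩
    simp only [pvFind, hp]
    by_cases he : p = v
    · simp [he]
    · simp only [if_neg he]
      have hplt : p < v := lt_of_le_of_ne hp2 he
      exact ih p (by omega) hp1 (by omega) f1' f2' (by omega) (by omega)

lemma pvRoot_unfold_self (n : Nat) (par : PySem.Dict Int Int) (v : Int)
    (hp : par.get? v = some v) : pvRoot n par v = v := by
  simp [pvRoot, pvFind, hp]

lemma pvRoot_unfold_step (n : Nat) (par : PySem.Dict Int Int)
    (hpar : ∀ v : Int, 1 ≤ v → v ≤ (n : Int) → ∃ p, par.get? v = some p ∧ 1 ≤ p ∧ p ≤ v)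
    (v p : Int) (h1v : 1 ≤ v) (h2v : v ≤ (n : Int)) (hp : par.get? v = some p)
    (hne : p ≠ v) (hp1 : 1 ≤ p) (hp2 : p ≤ v) :
    pvRoot n par v = pvRoot n par p := by
  unfold pvRoot
  have hstep : pvFind par (n + 1) v = pvFind par n p := by
    simp [pvFind, hp, hne]
  rw [hstep]
  exact pvFind_fuel n par hpar p.toNat p le_rfl hp1 (by omega) n (n + 1) (by omega) (by omega)

lemma pvRoot_props (n : Nat) (par : PySem.Dict Int Int) (R : Int → Int → Prop)
    (hR : Equivalence R)
    (hpar : ∀ v : Int, 1 ≤ v → v ≤ (n : Int) →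
      ∃ p, par.get? v = some p ∧ 1 ≤ p ∧ p ≤ v ∧ R v p) :
    ∀ (m : Nat) (v : Int), v.toNat ≤ m → 1 ≤ v → v ≤ (n : Int) →
      (1 ≤ pvRoot n par v ∧ pvRoot n par v ≤ v) ∧
      par.get? (pvRoot n par v) = some (pvRoot n par v) ∧
      R v (pvRoot n par v) := by
  have hparN : ∀ v : Int, 1 ≤ v → v ≤ (n : Int) → ∃ p, par.get? v = some p ∧ 1 ≤ p ∧ p ≤ v :=
    fun v h1 h2 => (hpar v h1 h2).elim (fun p hp => ⟨p, hp.1, hp.2.1, hp.2.2.1⟩)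
  intro m
  induction m with
  | zero => intro v hm h1 h2; omega
  | succ m ih =>
    intro v hm h1 h2
    obtain ⟨p, hp, hp1, hp2, hpR⟩ := hpar v h1 h2
    by_cases he : p = v
    · subst he
      rw [pvRoot_unfold_self n par p hp]
      exact ⟨⟨hp1, le_rfl⟩, hp, hR.refl p⟩
    · have hplt : p < v := lt_of_le_of_ne hp2 he
      rw [pvRoot_unfold_step n par hparN v p h1 h2 hp he hp1 hp2]
      obtain ⟨⟨hb1, hb2⟩, hroot, hrel⟩ := ih p (by omega) hp1 (by omega)
      exact ⟨⟨hb1, by omega⟩, hroot, hR.trans hpR hrel⟩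

lemma pvRoot_redirect (n : Nat) (par : PySem.Dict Int Int)
    (hpar : ∀ v : Int, 1 ≤ v → v ≤ (n : Int) → ∃ p, par.get? v = some p ∧ 1 ≤ p ∧ p ≤ v)
    (rmx rmn : Int) (hmx : par.get? rmx = some rmx) (hmn : par.get? rmn = some rmn)
    (h1mn : 1 ≤ rmn) (hlt : rmn < rmx) (hxn : rmx ≤ (n : Int)) :
    ∀ (m : Nat) (v : Int), v.toNat ≤ m → 1 ≤ v → v ≤ (n : Int) →
      pvRoot n (par.insert rmx rmn) v
        = if pvRoot n par v = rmx then rmn else pvRoot n par v := by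
  have hpar' : ∀ v : Int, 1 ≤ v → v ≤ (n : Int) →
      ∃ p, (par.insert rmx rmn).get? v = some p ∧ 1 ≤ p ∧ p ≤ v := by
    intro v h1 h2
    by_cases hv : v = rmx
    · subst hv
      exact ⟨rmn, PySem.Dict.get?_insert_self _ _ _, h1mn, by omega⟩
    · obtain ⟨p, hp, hp1, hp2⟩ := hpar v h1 h2
      exact ⟨p, by rw [PySem.Dict.get?_insert_of_ne par _ hv]; exact hp, hp1, hp2⟩
  intro m
  induction m with
  | zero => intro v hm h1 h2; omega
  | succ m ih =>
    intro v hm h1 h2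
    by_cases hv : v = rmx
    · rw [hv]
      have hmx' : (par.insert rmx rmn).get? rmx = some rmn := PySem.Dict.get?_insert_self _ _ _
      have hmn' : (par.insert rmx rmn).get? rmn = some rmn := by
        rw [PySem.Dict.get?_insert_of_ne par _ (by omega : rmn ≠ rmx)]; exact hmn
      rw [pvRoot_unfold_step n (par.insert rmx rmn) hpar' rmx rmn (by omega) hxn hmx' (by omega)
        h1mn (by omega)]
      rw [pvRoot_unfold_self n (par.insert rmx rmn) rmn hmn']
      rw [pvRoot_unfold_self n par rmx hmx]
      simp
    · obtain ⟨p, hp, hp1, hp2⟩ := hpar v h1 h2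
      have hp' : (par.insert rmx rmn).get? v = some p := by
        rw [PySem.Dict.get?_insert_of_ne par _ hv]; exact hp
      by_cases hpe : p = v
      · subst hpe
        rw [pvRoot_unfold_self n (par.insert rmx rmn) p hp',
          pvRoot_unfold_self n par p hp]
        rw [if_neg hv]
      · have hplt : p < v := lt_of_le_of_ne hp2 hpe
        rw [pvRoot_unfold_step n (par.insert rmx rmn) hpar' v p h1 h2 hp' hpe hp1 hp2]
        rw [pvRoot_unfold_step n par hpar v p h1 h2 hp hpe hp1 hp2]
        exact ih p (by omega) hp1 (by omega)

/-- The equivalence obtained by merging the classes of `a` and `b`. -/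
def pvJoin (R : Int → Int → Prop) (a b : Int) : Int → Int → Prop :=
  fun u w => R u w ∨ (R u a ∧ R b w) ∨ (R u b ∧ R a w)

lemma pvJoin_equiv (R : Int → Int → Prop) (a b : Int) (hR : Equivalence R) :
    Equivalence (pvJoin R a b) := by
  refine ⟨fun u => Or.inl (hR.refl u), ?_, ?_⟩
  · rintro u w (h | ⟨h1, h2⟩ | ⟨h1, h2⟩)
    · exact Or.inl (hR.symm h)
    · exact Or.inr (Or.inr ⟨hR.symm h2, hR.symm h1⟩)
    · exact Or.inr (Or.inl ⟨hR.symm h2, hR.symm h1⟩)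
  · rintro u w z (h | ⟨h1, h2⟩ | ⟨h1, h2⟩) (h' | ⟨h1', h2'⟩ | ⟨h1', h2'⟩)
    · exact Or.inl (hR.trans h h')
    · exact Or.inr (Or.inl ⟨hR.trans h h1', h2'⟩)
    · exact Or.inr (Or.inr ⟨hR.trans h h1', h2'⟩)
    · exact Or.inr (Or.inl ⟨h1, hR.trans h2 h'⟩)
    · exact Or.inr (Or.inl ⟨h1, h2'⟩)
    · exact Or.inl (hR.trans h1 h2')
    · exact Or.inr (Or.inr ⟨h1, hR.trans h2 h'⟩)
    · exact Or.inl (hR.trans h1 h2')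
    · exact Or.inr (Or.inr ⟨h1, h2'⟩)

lemma pvJoin_of_rel (R : Int → Int → Prop) (a b : Int) (hR : Equivalence R) (hab : R a b) :
    ∀ u w, pvJoin R a b u w ↔ R u w := by
  intro u w
  constructor
  · rintro (h | ⟨h1, h2⟩ | ⟨h1, h2⟩)
    · exact h
    · exact hR.trans (hR.trans h1 hab) h2
    · exact hR.trans (hR.trans h1 (hR.symm hab)) h2
  · exact Or.inl

lemma pvJoin_comm (R : Int → Int → Prop) (a b : Int) :
    ∀ u w, pvJoin R a b u w ↔ pvJoin R b a u w := by
  intro u w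
  unfold pvJoin
  tauto

/-- The union-find invariant: `par` has the original keys, every parent pointer decreases
and stays in its class, and two vertices have equal roots iff `R` relates them. -/
def pvUFInv (g : List (Int × List Int)) (R : Int → Int → Prop)
    (par : PySem.Dict Int Int) : Prop :=
  PySem.Dict.keys par = g.map Prod.fst ∧
  (∀ v : Int, 1 ≤ v → v ≤ (g.length : Int) →
    ∃ p, par.get? v = some p ∧ 1 ≤ p ∧ p ≤ v ∧ R v p) ∧
  (∀ v w : Int, 1 ≤ v → v ≤ (g.length : Int) → 1 ≤ w → w ≤ (g.length : Int) →
    (pvRoot g.length par v = pvRoot g.length par w ↔ R v w))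

lemma pvUFInv_iff (g : List (Int × List Int)) (R R' : Int → Int → Prop)
    (par : PySem.Dict Int Int) (h : ∀ u w, R u w ↔ R' u w) (hinv : pvUFInv g R par) :
    pvUFInv g R' par := by
  obtain ⟨h1, h2, h3⟩ := hinv
  refine ⟨h1, ?_, ?_⟩
  · intro v hv1 hv2
    obtain ⟨p, hp, hpa, hpb, hpR⟩ := h2 v hv1 hv2
    exact ⟨p, hp, hpa, hpb, (h v p).mp hpR⟩
  · intro v w hv1 hv2 hw1 hw2
    rw [h3 v w hv1 hv2 hw1 hw2]
    exact h v w

lemma pvLink_inv (g : List (Int × List Int)) (hwf : pvWF g) (R : Int → Int → Prop)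
    (hR : Equivalence R) (par : PySem.Dict Int Int) (hinv : pvUFInv g R par) (a b : Int)
    (ha : 1 ≤ a ∧ a ≤ (g.length : Int)) (hb : 1 ≤ b ∧ b ≤ (g.length : Int))
    (hord : pvRoot g.length par b < pvRoot g.length par a) :
    pvUFInv g (pvJoin R a b) (par.insert (pvRoot g.length par a) (pvRoot g.length par b)) := by
  obtain ⟨hkeys, hparR, hchar⟩ := hinv
  have hparN : ∀ v : Int, 1 ≤ v → v ≤ (g.length : Int) →
      ∃ p, par.get? v = some p ∧ 1 ≤ p ∧ p ≤ v :=
    fun v h1 h2 => (hparR v h1 h2).elim (fun p hp => ⟨p, hp.1, hp.2.1, hp.2.2.1⟩)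
  obtain ⟨⟨hra1, hra2⟩, hraroot, hraR⟩ :=
    pvRoot_props g.length par R hR hparR a.toNat a le_rfl ha.1 ha.2
  obtain ⟨⟨hrb1, hrb2⟩, hrbroot, hrbR⟩ :=
    pvRoot_props g.length par R hR hparR b.toNat b le_rfl hb.1 hb.2
  have hran : pvRoot g.length par a ≤ (g.length : Int) := by omega
  have hcont : par.contains (pvRoot g.length par a) = true := by
    rw [PySem.Dict.contains_iff_mem_keys, hkeys]
    exact pv_keys_cover g hwf _ hra1 hran
  refine ⟨?_, ?_, ?_⟩
  · rw [PySem.Dict.keys_insert_of_contains _ _ hcont]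
    exact hkeys
  · intro v h1 h2
    by_cases hv : v = pvRoot g.length par a
    · subst hv
      refine ⟨pvRoot g.length par b, PySem.Dict.get?_insert_self _ _ _, hrb1, by omega, ?_⟩
      exact Or.inr (Or.inl ⟨hR.symm hraR, hrbR⟩)
    · obtain ⟨p, hp, hpa, hpb, hpR⟩ := hparR v h1 h2
      exact ⟨p, by rw [PySem.Dict.get?_insert_of_ne par _ hv]; exact hp, hpa, hpb, Or.inl hpR⟩
  · intro v w hv1 hv2 hw1 hw2
    have hred := pvRoot_redirect g.length par hparN (pvRoot g.length par a)
      (pvRoot g.length par b) hraroot hrbroot hrb1 hord hran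
    rw [hred v.toNat v le_rfl hv1 hv2, hred w.toNat w le_rfl hw1 hw2]
    have hva : ∀ u, 1 ≤ u → u ≤ (g.length : Int) →
        (pvRoot g.length par u = pvRoot g.length par a ↔ R u a) :=
      fun u h1u h2u => hchar u a h1u h2u ha.1 ha.2
    have hvb : ∀ u, 1 ≤ u → u ≤ (g.length : Int) →
        (pvRoot g.length par u = pvRoot g.length par b ↔ R u b) :=
      fun u h1u h2u => hchar u b h1u h2u hb.1 hb.2
    by_cases h1 : pvRoot g.length par v = pvRoot g.length par a
    · by_cases h2 : pvRoot g.length par w = pvRoot g.length par a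
      · rw [if_pos h1, if_pos h2]
        constructor
        · intro _
          exact Or.inl (hR.trans ((hva v hv1 hv2).mp h1) (hR.symm ((hva w hw1 hw2).mp h2)))
        · intro _; rfl
      · rw [if_pos h1, if_neg h2]
        constructor
        · intro hbw
          exact Or.inr (Or.inl ⟨(hva v hv1 hv2).mp h1,
            hR.symm ((hvb w hw1 hw2).mp hbw.symm)⟩)
        · rintro (h | ⟨hva', hbw⟩ | ⟨hvb', haw⟩)
          · exact absurd (((hchar v w hv1 hv2 hw1 hw2).mpr h) ▸ h1) h2
          · exact ((hvb w hw1 hw2).mpr (hR.symm hbw)).symm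
          · exact absurd ((hva w hw1 hw2).mpr (hR.symm haw)) h2
    · by_cases h2 : pvRoot g.length par w = pvRoot g.length par a
      · rw [if_neg h1, if_pos h2]
        constructor
        · intro hvb'
          exact Or.inr (Or.inr ⟨(hvb v hv1 hv2).mp hvb', hR.symm ((hva w hw1 hw2).mp h2)⟩)
        · rintro (h | ⟨hva', hbw⟩ | ⟨hvb', haw⟩)
          · exact absurd (((hchar v w hv1 hv2 hw1 hw2).mpr h).symm ▸ h2) h1
          · exact absurd ((hva v hv1 hv2).mpr hva') h1
          · exact (hvb v hv1 hv2).mpr hvb'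
      · rw [if_neg h1, if_neg h2]
        rw [hchar v w hv1 hv2 hw1 hw2]
        constructor
        · exact Or.inl
        · rintro (h | ⟨hva', hbw⟩ | ⟨hvb', haw⟩)
          · exact h
          · exact absurd ((hva v hv1 hv2).mpr hva') h1
          · exact absurd ((hva w hw1 hw2).mpr (hR.symm haw)) h2

lemma pvUnionStep_inv (g : List (Int × List Int)) (hwf : pvWF g) (R : Int → Int → Prop)
    (hR : Equivalence R) (par : PySem.Dict Int Int) (hinv : pvUFInv g R par) (a b : Int)
    (ha : 1 ≤ a ∧ a ≤ (g.length : Int)) (hb : 1 ≤ b ∧ b ≤ (g.length : Int)) :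
    Equivalence (pvJoin R a b) ∧ pvUFInv g (pvJoin R a b) (pvUnionStep g.length par a b) := by
  refine ⟨pvJoin_equiv R a b hR, ?_⟩
  have hstep : pvUnionStep g.length par a b =
      (if pvRoot g.length par a = pvRoot g.length par b then par
       else if pvRoot g.length par a < pvRoot g.length par b
       then par.insert (pvRoot g.length par b) (pvRoot g.length par a)
       else par.insert (pvRoot g.length par a) (pvRoot g.length par b)) := rfl
  rw [hstep]
  by_cases he : pvRoot g.length par a = pvRoot g.length par b
  · rw [if_pos he]
    have hab : R a b := (hinv.2.2 a b ha.1 ha.2 hb.1 hb.2).mp he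
    exact pvUFInv_iff g R (pvJoin R a b) par
      (fun u w => (pvJoin_of_rel R a b hR hab u w).symm) hinv
  · rw [if_neg he]
    by_cases hlt : pvRoot g.length par a < pvRoot g.length par b
    · rw [if_pos hlt]
      exact pvUFInv_iff g (pvJoin R b a) (pvJoin R a b)
        (par.insert (pvRoot g.length par b) (pvRoot g.length par a))
        (fun u w => pvJoin_comm R b a u w)
        (pvLink_inv g hwf R hR par hinv b a hb ha hlt)
    · rw [if_neg hlt]
      exact pvLink_inv g hwf R hR par hinv a b ha hb (by omega)

/-- All joins produced by a list of edges. -/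
def pvJoinList : List (Int × Int) → (Int → Int → Prop) → (Int → Int → Prop)
  | [], R => R
  | e :: es, R => pvJoinList es (pvJoin R e.1 e.2)

lemma pvFoldUF (g : List (Int × List Int)) (hwf : pvWF g) :
    ∀ (es : List (Int × Int)) (R : Int → Int → Prop) (par : PySem.Dict Int Int),
    (∀ e ∈ es, (1 ≤ e.1 ∧ e.1 ≤ (g.length : Int)) ∧ (1 ≤ e.2 ∧ e.2 ≤ (g.length : Int))) →
    Equivalence R → pvUFInv g R par →
    Equivalence (pvJoinList es R) ∧
      pvUFInv g (pvJoinList es R)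
        (es.foldl (fun par e => pvUnionStep g.length par e.1 e.2) par) := by
  intro es
  induction es with
  | nil => intro R par _ hR hinv; exact ⟨hR, hinv⟩
  | cons e es ih =>
    intro R par hb hR hinv
    obtain ⟨hR', hinv'⟩ := pvUnionStep_inv g hwf R hR par hinv e.1 e.2
      (hb e List.mem_cons_self).1 (hb e List.mem_cons_self).2
    simpa only [pvJoinList, List.foldl_cons] using
      ih (pvJoin R e.1 e.2) (pvUnionStep g.length par e.1 e.2)
        (fun z hz => hb z (List.mem_cons_of_mem _ hz)) hR' hinv'

lemma pvEqvGen_sub {r s : Int → Int → Prop}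
    (h : ∀ u w, r u w → Relation.EqvGen s u w) :
    ∀ u w, Relation.EqvGen r u w → Relation.EqvGen s u w := by
  intro u w hg
  induction hg with
  | rel x y hr => exact h x y hr
  | refl x => exact Relation.EqvGen.refl x
  | symm x y _ ih => exact Relation.EqvGen.symm x y ih
  | trans x y z _ _ ih1 ih2 => exact Relation.EqvGen.trans x y z ih1 ih2

lemma pvJoinList_iff : ∀ (es : List (Int × Int)) (R : Int → Int → Prop), Equivalence R →
    ∀ u w, pvJoinList es R u w
      ↔ Relation.EqvGen (fun p q => R p q ∨ (p, q) ∈ es) u w := by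
  intro es
  induction es with
  | nil =>
    intro R hR u w
    simp only [pvJoinList]
    constructor
    · intro h; exact Relation.EqvGen.rel u w (Or.inl h)
    · intro h
      refine hR.eqvGen_iff.mp (pvEqvGen_sub ?_ u w h)
      rintro p q (hr | hm)
      · exact Relation.EqvGen.rel p q hr
      · exact absurd hm (List.not_mem_nil)
  | cons e es ih =>
    intro R hR u w
    have he : (e.1, e.2) ∈ e :: es := by cases e; exact List.mem_cons_self
    simp only [pvJoinList]
    rw [ih (pvJoin R e.1 e.2) (pvJoin_equiv _ _ _ hR) u w]
    constructor
    · apply pvEqvGen_sub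
      rintro p q (( hr | ⟨h1, h2⟩ | ⟨h1, h2⟩) | hm)
      · exact Relation.EqvGen.rel p q (Or.inl hr)
      · exact Relation.EqvGen.trans _ _ _ (Relation.EqvGen.rel _ _ (Or.inl h1))
          (Relation.EqvGen.trans _ _ _ (Relation.EqvGen.rel _ _ (Or.inr he))
            (Relation.EqvGen.rel _ _ (Or.inl h2)))
      · exact Relation.EqvGen.trans _ _ _ (Relation.EqvGen.rel _ _ (Or.inl h1))
          (Relation.EqvGen.trans _ _ _
            (Relation.EqvGen.symm _ _ (Relation.EqvGen.rel _ _ (Or.inr he)))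
            (Relation.EqvGen.rel _ _ (Or.inl h2)))
      · exact Relation.EqvGen.rel p q (Or.inr (List.mem_cons_of_mem _ hm))
    · apply pvEqvGen_sub
      rintro p q (hr | hm)
      · exact Relation.EqvGen.rel p q (Or.inl (Or.inl hr))
      · rcases List.mem_cons.mp hm with h | h
        · obtain ⟨a, b⟩ := e
          obtain ⟨h1, h2⟩ := Prod.mk.injEq .. ▸ h
          exact Relation.EqvGen.rel p q
            (Or.inl (Or.inr (Or.inl ⟨h1 ▸ hR.refl p, h2 ▸ hR.refl b⟩)))
        · exact Relation.EqvGen.rel p q (Or.inr h)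

/-- All listed roads, as a list of directed pairs. -/
def pvEdges (g : List (Int × List Int)) : List (Int × Int) :=
  (g.map Prod.fst).flatMap (fun k => (pvAdj g k).map (fun w => (k, w)))

lemma pvEdges_iff (g : List (Int × List Int)) (p q : Int) :
    (p, q) ∈ pvEdges g ↔ pvStepR g p q := by
  unfold pvEdges
  rw [List.mem_flatMap]
  constructor
  · rintro ⟨k, hk, hm⟩
    obtain ⟨w, hw, heq⟩ := List.mem_map.mp hm
    injection heq with h1 h2
    subst h1
    subst h2
    exact hw
  · intro h
    have hkeys : p ∈ g.map Prod.fst := by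
      obtain ⟨ns, hg, _⟩ := pvStepR_adj g p q h
      by_contra hnp
      have hnone : (PySem.Dict.mk g).get? p = none := by
        refine (PySem.Dict.get?_eq_none_iff_not_mem_keys _ _).mpr ?_
        rw [PySem.Dict.keys_mk]
        exact fun hm => hnp hm
      rw [hnone] at hg
      cases hg
    exact ⟨p, hkeys, List.mem_map.mpr ⟨q, h, rfl⟩⟩

lemma pvEdges_bounds (g : List (Int × List Int)) (hwf : pvWF g) :
    ∀ e ∈ pvEdges g,
      (1 ≤ e.1 ∧ e.1 ≤ (g.length : Int)) ∧ (1 ≤ e.2 ∧ e.2 ≤ (g.length : Int)) := by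
  rintro ⟨a, b⟩ he
  exact pvStepR_bounds g hwf a b ((pvEdges_iff g a b).mp he)

lemma pvNestedFold (g : List (Int × List Int)) :
    ∀ (ks : List Int) (par : PySem.Dict Int Int),
    ks.foldl (fun par v =>
        (((PySem.Dict.mk g).get? v).getD []).foldl
          (fun par w => pvUnionStep g.length par v w) par) par
      = (ks.flatMap (fun k => (pvAdj g k).map (fun w => (k, w)))).foldl
          (fun par e => pvUnionStep g.length par e.1 e.2) par := by
  intro ks
  induction ks with
  | nil => intro par; rfl
  | cons v ks ih =>
    intro par
    have hstep : (((PySem.Dict.mk g).get? v).getD []).foldl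
          (fun par w => pvUnionStep g.length par v w) par
        = ((pvAdj g v).map (fun w => (v, w))).foldl
            (fun par e => pvUnionStep g.length par e.1 e.2) par := by
      simp [List.foldl_map, pvAdj]
    rw [List.foldl_cons, List.flatMap_cons, List.foldl_append, ih, hstep]

lemma pvUFInv_init (g : List (Int × List Int)) (hwf : pvWF g) :
    pvUFInv g Eq (PySem.Dict.mk ((g.map Prod.fst).map (fun k => (k, k)))) := by
  have hkeys : (PySem.Dict.mk ((g.map Prod.fst).map (fun k => (k, k)))).keys
      = g.map Prod.fst := by
    rw [PySem.Dict.keys_mk, List.map_map]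
    simp
  have hnd : (PySem.Dict.mk ((g.map Prod.fst).map (fun k => (k, k)))).keys.Nodup := by
    rw [hkeys]; exact hwf.1
  have hget : ∀ v ∈ g.map Prod.fst,
      (PySem.Dict.mk ((g.map Prod.fst).map (fun k => (k, k)))).get? v = some v := by
    intro v hv
    exact PySem.Dict.get?_of_mem_items _ (List.mem_map.mpr ⟨v, hv, rfl⟩) hnd
  refine ⟨hkeys, ?_, ?_⟩
  · intro v h1 h2
    exact ⟨v, hget v (pv_keys_cover g hwf v h1 h2), h1, le_rfl, rfl⟩
  · intro v w h1 h2 h3 h4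
    rw [pvRoot_unfold_self _ _ v (hget v (pv_keys_cover g hwf v h1 h2)),
      pvRoot_unfold_self _ _ w (hget w (pv_keys_cover g hwf w h3 h4))]

lemma pvEqvGen_conn (g : List (Int × List Int)) (hwf : pvWF g) (u w : Int) :
    Relation.EqvGen (fun p q => p = q ∨ pvStepR g p q) u w ↔ pvConn g u w := by
  constructor
  · intro h
    induction h with
    | rel x y hr =>
      rcases hr with h | h
      · exact h ▸ Relation.ReflTransGen.refl
      · exact Relation.ReflTransGen.single h
    | refl x => exact Relation.ReflTransGen.refl
    | symm x y _ ih => exact pvConn_symm g hwf ih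
    | trans x y z _ _ ih1 ih2 => exact Relation.ReflTransGen.trans ih1 ih2
  · intro h
    induction h with
    | refl => exact Relation.EqvGen.refl u
    | tail _ hstep ih =>
      exact Relation.EqvGen.trans _ _ _ ih (Relation.EqvGen.rel _ _ (Or.inr hstep))

lemma pvJoinListEdges_conn (g : List (Int × List Int)) (hwf : pvWF g) (u w : Int) :
    pvJoinList (pvEdges g) Eq u w ↔ pvConn g u w := by
  rw [pvJoinList_iff (pvEdges g) Eq eq_equivalence u w]
  have hpred : (fun p q : Int => p = q ∨ (p, q) ∈ pvEdges g)
      = (fun p q : Int => p = q ∨ pvStepR g p q) := by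
    funext p q
    exact propext (or_congr_right (pvEdges_iff g p q))
  rw [hpred]
  exact pvEqvGen_conn g hwf u w

lemma pvRootEqRG (g : List (Int × List Int)) (hwf : pvWF g) (R : Int → Int → Prop)
    (hR : Equivalence R) (par : PySem.Dict Int Int) (hinv : pvUFInv g R par)
    (hconn : ∀ u w, R u w ↔ pvConn g u w) (v : Int)
    (hv : 1 ≤ v ∧ v ≤ (g.length : Int)) :
    pvRoot g.length par v = pvRG g v := by
  obtain ⟨hkeys, hparR, hchar⟩ := hinv
  obtain ⟨⟨hr1, hr2⟩, hroot, hrel⟩ :=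
    pvRoot_props g.length par R hR hparR v.toNat v le_rfl hv.1 hv.2
  have hconnvr : pvConn g v (pvRoot g.length par v) := (hconn _ _).mp hrel
  obtain ⟨hcrg, hrgIcc, hmin⟩ := pvRG_spec g v hv
  have hle1 : pvRG g v ≤ pvRoot g.length par v := hmin _ hconnvr hr1 (by omega)
  have hle2 : pvRoot g.length par v ≤ pvRG g v := by
    have hR2 : R v (pvRG g v) := (hconn _ _).mpr hcrg
    have heq : pvRoot g.length par v = pvRoot g.length par (pvRG g v) :=
      (hchar v (pvRG g v) hv.1 hv.2 hrgIcc.1 hrgIcc.2).mpr hR2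
    obtain ⟨⟨_, hb⟩, _, _⟩ :=
      pvRoot_props g.length par R hR hparR (pvRG g v).toNat _ le_rfl hrgIcc.1 hrgIcc.2
    omega
  omega

lemma pvRootFix (g : List (Int × List Int)) (R : Int → Int → Prop) (hR : Equivalence R)
    (par : PySem.Dict Int Int) (hinv : pvUFInv g R par) (v : Int)
    (hv : 1 ≤ v ∧ v ≤ (g.length : Int)) :
    par.get? v = some v ↔ pvRoot g.length par v = v := by
  have hparN : ∀ v : Int, 1 ≤ v → v ≤ (g.length : Int) →
      ∃ p, par.get? v = some p ∧ 1 ≤ p ∧ p ≤ v :=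
    fun v h1 h2 => (hinv.2.1 v h1 h2).elim (fun p hp => ⟨p, hp.1, hp.2.1, hp.2.2.1⟩)
  constructor
  · exact pvRoot_unfold_self g.length par v
  · intro h
    obtain ⟨p, hp, hp1, hp2, _⟩ := hinv.2.1 v hv.1 hv.2
    by_cases hpe : p = v
    · exact hpe ▸ hp
    · exfalso
      rw [pvRoot_unfold_step g.length par hparN v p hv.1 hv.2 hp hpe hp1 hp2] at h
      obtain ⟨⟨_, hb⟩, _, _⟩ := pvRoot_props g.length par R hR hinv.2.1 p.toNat p le_rfl hp1
        (by omega)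
      omega

lemma pvCountFold (par : PySem.Dict Int Int) : ∀ (l : List Int) (c : Int),
    l.foldl (fun c v => if par.get? v = some v then c + 1 else c) c
      = c + (l.countP (fun v => decide (par.get? v = some v)) : Int) := by
  intro l
  induction l with
  | nil => intro c; simp
  | cons v l ih =>
    intro c
    rw [List.foldl_cons, List.countP_cons]
    by_cases h : par.get? v = some v
    · simp only [h, if_pos, decide_true, ih]
      push_cast
      ring
    · simp only [if_neg h, ih, decide_eq_true_eq, h]
      simp

lemma pvCountFix (r : Int → Int) (l : List Int) (hnd : l.Nodup)
    (hmem : ∀ v ∈ l, r v ∈ l) (hidem : ∀ v ∈ l, r (r v) = r v) :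
    l.countP (fun v => decide (r v = v)) = ((l.map r).toFinset).card := by
  have h1 : (l.map r).toFinset = l.toFinset.image r := by
    ext u
    simp [List.mem_map]
  have h2 : l.toFinset.image r = l.toFinset.filter (fun u => r u = u) := by
    ext u
    simp only [Finset.mem_image, Finset.mem_filter, List.mem_toFinset]
    constructor
    · rintro ⟨v, hv, rfl⟩
      exact ⟨hmem v hv, hidem v hv⟩
    · rintro ⟨hu, hru⟩
      exact ⟨u, hu, hru⟩
  have h3 : (l.filter (fun v => decide (r v = v))).toFinset
      = l.toFinset.filter (fun u => r u = u) := by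
    ext u
    simp [List.mem_filter]
  rw [h1, h2, ← h3, List.toFinset_card_of_nodup (hnd.filter _),
    List.countP_eq_length_filter]

lemma pvCountPCongr (l : List Int) (p q : Int → Bool) (h : ∀ a ∈ l, p a = q a) :
    l.countP p = l.countP q := by
  induction l with
  | nil => rfl
  | cons a l ih =>
    rw [List.countP_cons, List.countP_cons, h a List.mem_cons_self,
      ih (fun b hb => h b (List.mem_cons_of_mem _ hb))]

/-- B's else-branch value: the number of components times `x` plus roads for the rest. -/
lemma pvAltElse (g : List (Int × List Int)) (hwf : pvWF g) (x y : Int) (hxy : ¬ x < y) :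
    findMinimumCostToLabifyGTU_alt x y g
      = ((((g.map Prod.fst).map (pvRG g)).toFinset.card : Int)) * x
        + ((g.length : Int) - (((g.map Prod.fst).map (pvRG g)).toFinset.card : Int)) * y := by
  obtain ⟨hReq, hinv⟩ := pvFoldUF g hwf (pvEdges g) Eq
    (PySem.Dict.mk ((g.map Prod.fst).map (fun k => (k, k))))
    (pvEdges_bounds g hwf) eq_equivalence (pvUFInv_init g hwf)
  have hconn : ∀ u w, pvJoinList (pvEdges g) Eq u w ↔ pvConn g u w :=
    pvJoinListEdges_conn g hwf
  have hkeysIn : ∀ v ∈ g.map Prod.fst, 1 ≤ v ∧ v ≤ (g.length : Int) := by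
    intro v hv
    obtain ⟨p, hp, rfl⟩ := List.mem_map.mp hv
    exact (hwf.2.1 p hp).1
  have hE : (g.map Prod.fst).flatMap (fun k => (pvAdj g k).map (fun w => (k, w)))
      = pvEdges g := rfl
  simp only [findMinimumCostToLabifyGTU_alt, if_neg hxy]
  rw [pvNestedFold g (g.map Prod.fst), hE, pvCountFold, hinv.1]
  have hcong : (g.map Prod.fst).countP
        (fun v => decide (((pvEdges g).foldl (fun par e => pvUnionStep g.length par e.1 e.2)
          (PySem.Dict.mk ((g.map Prod.fst).map (fun k => (k, k))))).get? v = some v))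
      = (g.map Prod.fst).countP (fun v => decide (pvRG g v = v)) := by
    apply pvCountPCongr
    intro v hv
    have hvI := hkeysIn v hv
    rw [decide_eq_decide]
    rw [pvRootFix g (pvJoinList (pvEdges g) Eq) hReq _ hinv v hvI]
    rw [pvRootEqRG g hwf (pvJoinList (pvEdges g) Eq) hReq _ hinv hconn v hvI]
  rw [hcong]
  have hmem : ∀ v ∈ g.map Prod.fst, pvRG g v ∈ g.map Prod.fst := by
    intro v hv
    have h := (pvRG_spec g v (hkeysIn v hv)).2.1
    exact pv_keys_cover g hwf _ h.1 h.2
  have hidem : ∀ v ∈ g.map Prod.fst, pvRG g (pvRG g v) = pvRG g v :=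
    fun v hv => pvRG_idem g hwf v (hkeysIn v hv)
  rw [pvCountFix (pvRG g) (g.map Prod.fst) hwf.1 hmem hidem]
  ring

-- ===== VERDICT (by name: the statement is the Claim_ definition above) =====
theorem findMinimumCostToLabifyGTU_spec : Claim_equal_findMinimumCostToLabifyGTU := by
  unfold Claim_equal_findMinimumCostToLabifyGTU
  intro x y g _ hpre
  unfold Spec_findMinimumCostToLabifyGTU
  by_cases hxy : x < y
  · simp [findMinimumCostToLabifyGTU, findMinimumCostToLabifyGTU_alt, hxy]
  · have hwf : pvWF g := by
      rcases hpre with h | h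
      · exact absurd h hxy
      · exact h
    have hks : ∀ k ∈ g.map Prod.fst, 1 ≤ k ∧ k ≤ (g.length : Int) := by
      intro k hk
      obtain ⟨p, hp, rfl⟩ := List.mem_map.mp hk
      exact (hwf.2.1 p hp).1
    have hrel0 : pvRel g.length (List.replicate g.length false) PySem.Set.empty := by
      constructor
      · intro v hv
        simp [PySem.Set.empty] at hv
      · intro j hj
        rw [List.getD_eq_getElem _ _ (by simpa using hj), List.getElem_replicate]
        simp [PySem.Set.empty]
    have hpar0 : pvPar g.length (List.replicate g.length (-1)) (List.replicate g.length false) := by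
      intro j hj _
      rw [List.getD_eq_getElem _ _ (by simpa using hj), List.getElem_replicate]
    have hcnt0 : ((List.replicate g.length (-1 : Int)).count (-1) : Int)
        + ((List.replicate g.length false).count true : Int) = (g.length : Int) + 0 := by
      rw [List.count_replicate, List.count_replicate]
      simp
    obtain ⟨pa', il', comp', vis', hA, hB, hil', hpa', hrel', hkin, _, hcnt', hcomp'⟩ :=
      pvOuter g hwf (g.map Prod.fst) [] (List.replicate g.length (-1))
        (List.replicate g.length false) 0 PySem.Set.empty hks
        (fun k hk => absurd hk (List.not_mem_nil))
        (by intro v; simp [PySem.Set.empty])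
        (by simp) (by simp) hrel0
        (fun v hv => absurd hv (by simp [PySem.Set.empty])) hpar0 hcnt0
    have halltrue : ∀ b ∈ il', b = true := by
      intro b hb
      obtain ⟨j, hj, rfl⟩ := List.getElem_of_mem hb
      have hjn : j < g.length := by rw [← hil']; exact hj
      have hkmem : ((j : Int) + 1) ∈ g.map Prod.fst :=
        pv_keys_cover g hwf _ (by omega) (by omega)
      have hv := hkin _ hkmem
      have ht := (hrel'.2 j hjn).mpr hv
      rw [List.getD_eq_getElem _ _ hj] at ht
      exact ht
    have hctrue : (il'.count true : Int) = (g.length : Int) := by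
      have h := List.count_eq_length.mpr (fun b hb => (halltrue b hb).symm)
      rw [h, hil']
    have hcomp : (pa'.count (-1) : Int) = comp' := by omega
    have hcompcard : comp'
        = ((((g.map Prod.fst).map (pvRG g)).toFinset.card : Int)) := by
      rw [hcomp']
      simp
    simp only [findMinimumCostToLabifyGTU, if_neg hxy]
    rw [hA, pvAltElse g hwf x y hxy]
    rw [pvCost x y pa' 0, hpa', hcomp, hcompcard]
    ring
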